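-- pv_equiv track=rewrite | github.com/fvckinfa/adventofcode2025 | code/2025/day12.py | is_space_sufficient
-- ===== SOURCE A (Python) =====
-- def is_space_sufficient(grid, width, height, required_area, min_item_area, slack=20):
--     """
--     Checks if grid has enough connected free space; skips expensive BFS if slack is high
--     """
--     used_area = sum(bin(row).count("1") for row in grid)
--     free_area = (width * height) - used_area
--
--     if free_area < required_area:
--         return False
--
--     # Skip connectivity check if plenty of space remains
--     if free_area > required_area + slack:
--         return True
--
--     # Floodffill to calculate usable connected area
--     visited = set()
--     usable_free_area = 0
--
--     # Map occupied cells for BFS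
--     collision = set()
--     for r in range(height):
--         row_val = grid[r]
--         if row_val == 0:
--             continue
--         for c in range(width):
--             if (row_val >> (width - 1 - c)) & 1:
--                 collision.add((r, c))
--
--     for r in range(height):
--         for c in range(width):
--             if (r, c) not in collision and (r, c) not in visited:
--                 # Found a new empty island
--                 q = [(r, c)]
--                 visited.add((r, c))
--                 island_size = 0
--                 idx = 0
--                 while idx < len(q):
--                     curr_r, curr_c = q[idx]
--                     idx += 1
--                     island_size += 1
--
--                     for nr, nc in ((curr_r + 1, curr_c), (curr_r - 1, curr_c), (curr_r, curr_c + 1), (curr_r, curr_c - 1)):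
--                         if 0 <= nr < height and 0 <= nc < width:
--                             if (nr, nc) not in collision and (nr, nc) not in visited:
--                                 visited.add((nr, nc))
--                                 q.append((nr, nc))
--
--                 # Pruning: Only count island if it fits the smallest remaining item
--                 if island_size >= min_item_area:
--                     usable_free_area += island_size
--
--                 if usable_free_area >= required_area:
--                     return True
--
--     return usable_free_area >= required_area
-- ===== SOURCE B (Python) =====
-- def is_space_sufficient(grid, width, height, required_area, min_item_area, slack=20):
--     """Checks if grid has enough connected free space; skips the connectivity
--     check if slack is high.  Connected free areas are found by single-pass
--     component labeling: each free cell joins the components of its up/left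
--     neighbours, relabeling one component when their labels differ."""
--     free_area = (width * height) - sum(bin(row).count("1") for row in grid)
--     if free_area < required_area:
--         return False
--     if free_area > required_area + slack:
--         return True
--
--     comp = {}      # free cell -> component label
--     members = {}   # component label -> its cells
--     for r in range(height):
--         for c in range(width):
--             if (grid[r] >> (width - 1 - c)) & 1:
--                 continue
--             labels = []
--             for n in ((r - 1, c), (r, c - 1)):
--                 if n in comp and comp[n] not in labels:
--                     labels.append(comp[n])
--             if labels:
--                 target = labels[0]
--                 for other in labels[1:]:
--                     for cell in members.pop(other):
--                         comp[cell] = target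
--                         members[target].append(cell)
--             else:
--                 target = (r, c)
--                 members[target] = []
--             comp[(r, c)] = target
--             members[target].append((r, c))
--
--     usable = sum(len(cells) for cells in members.values() if len(cells) >= min_item_area)
--     return usable >= required_area
-- ===== Notes on version B (the rewrite author's own statement) =====
-- stated objective: alternative
-- what changed: The two popcount guards stay, but the BFS flood fill (collision set, shared visited set, queue per island, early exit) is replaced by single-pass connected-component labeling: a row-major scan gives each free cell the label of its up/left neighbours, merging two components by relabeling one of them, then sums the sizes of components with size >= min_item_area. Pre_ excludes only the inputs where A raises IndexError (slow path reached with height > len(grid)).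
import Mathlib
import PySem

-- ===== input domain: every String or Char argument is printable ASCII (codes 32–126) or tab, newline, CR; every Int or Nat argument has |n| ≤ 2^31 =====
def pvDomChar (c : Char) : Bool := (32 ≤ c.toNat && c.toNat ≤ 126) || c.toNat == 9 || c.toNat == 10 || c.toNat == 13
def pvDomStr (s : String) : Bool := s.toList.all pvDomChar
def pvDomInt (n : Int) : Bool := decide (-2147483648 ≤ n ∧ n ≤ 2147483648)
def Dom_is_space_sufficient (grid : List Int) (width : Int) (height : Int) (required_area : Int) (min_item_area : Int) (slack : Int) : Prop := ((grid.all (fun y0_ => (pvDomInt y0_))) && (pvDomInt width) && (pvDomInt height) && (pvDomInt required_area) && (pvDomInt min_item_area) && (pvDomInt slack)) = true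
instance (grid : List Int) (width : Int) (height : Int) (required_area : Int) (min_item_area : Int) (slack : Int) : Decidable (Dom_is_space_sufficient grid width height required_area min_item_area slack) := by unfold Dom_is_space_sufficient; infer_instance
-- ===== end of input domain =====

-- B replaces A's BFS flood fill by a single row-major scan that labels each free cell and
-- merges components through a cell->label dict; objective: alternative decomposition (not faster).

-- ===== PORT A =====
-- sum(bin(row).count("1") for row in grid): popcount reads |row| (the '-' is not a '1')
def pvUsedArea (grid : List Int) : Int :=
  grid.foldl (fun acc row => acc + (PySem.Int.bitCount row : Int)) 0

def pvTestBit (row k : Int) : Bool := PySem.Int.band (row >>> k.toNat) 1 == 1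

def pvNbrs (p : Int × Int) : List (Int × Int) :=
  [(p.1 + 1, p.2), (p.1 - 1, p.2), (p.1, p.2 + 1), (p.1, p.2 - 1)]

def pvStep (occ : Int × Int → Bool) (height width : Int)
    (st : PySem.Set (Int × Int) × List (Int × Int)) (n : Int × Int) :
    PySem.Set (Int × Int) × List (Int × Int) :=
  if 0 ≤ n.1 ∧ n.1 < height ∧ 0 ≤ n.2 ∧ n.2 < width then
    if occ n = false ∧ PySem.Set.contains st.1 n = false then
      (PySem.Set.add st.1 n, st.2 ++ [n])
    else st
  else st

def pvBfsLoop (occ : Int × Int → Bool) (height width : Int) :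
    Nat → PySem.Set (Int × Int) → List (Int × Int) → Nat → Int →
    PySem.Set (Int × Int) × List (Int × Int) × Int
  | 0, visited, q, _, size => (visited, q, size)
  | fuel + 1, visited, q, idx, size =>
    match q[idx]? with
    | none => (visited, q, size)
    | some c =>
      let st := (pvNbrs c).foldl (pvStep occ height width) (visited, q)
      pvBfsLoop occ height width fuel st.1 st.2 (idx + 1) (size + 1)

def is_space_sufficient (grid : List Int) (width : Int) (height : Int) (required_area : Int) (min_item_area : Int) (slack : Int) : Bool :=
  let free_area := width * height - pvUsedArea grid
  if free_area < required_area then false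
  else if free_area > required_area + slack then true
  else
    let collision : PySem.Set (Int × Int) :=
      (PySem.List.pyRange 0 height).foldl (fun col r =>
        let row_val := PySem.List.pyGetD grid r 0
        if row_val == 0 then col
        else (PySem.List.pyRange 0 width).foldl (fun col c =>
          if pvTestBit row_val (width - 1 - c) then PySem.Set.add col (r, c) else col) col)
        (PySem.Set.ofList [])
    let res : Option (PySem.Set (Int × Int) × Int) :=
      (PySem.List.pyRange 0 height).foldl (fun st r =>
        (PySem.List.pyRange 0 width).foldl (fun st c =>
          match st with
          | none => none
          | some (visited, usable) =>
            if PySem.Set.contains collision (r, c) = false ∧ PySem.Set.contains visited (r, c) = false then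
              let out := pvBfsLoop (fun p => PySem.Set.contains collision p) height width
                (height.toNat * width.toNat + 1) (PySem.Set.add visited (r, c)) [(r, c)] 0 0
              let usable' := if out.2.2 ≥ min_item_area then usable + out.2.2 else usable
              if usable' ≥ required_area then none else some (out.1, usable')
            else st) st)
        (some (PySem.Set.ofList [], (0 : Int)))
    match res with
    | none => true
    | some (_, usable) => decide (usable ≥ required_area)

-- ===== PORT B =====
-- B (Source B): single row-major scan; comp: cell -> component label, members: label -> its cells
def pvNbrsUL (p : Int × Int) : List (Int × Int) := [(p.1 - 1, p.2), (p.1, p.2 - 1)]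

-- 'labels' list: distinct labels of the already-labeled up/left neighbours
def pvLabels (comp : PySem.Dict (Int × Int) (Int × Int)) (p : Int × Int) : List (Int × Int) :=
  (pvNbrsUL p).foldl (fun ls n =>
      match comp.get? n with
      | some l => if ls.contains l then ls else ls ++ [l]
      | none => ls) ([] : List (Int × Int))

-- body of 'for cell in members.pop(other): comp[cell] = target; members[target].append(cell)'
def pvRelabel (target : Int × Int)
    (st : PySem.Dict (Int × Int) (Int × Int) × PySem.Dict (Int × Int) (List (Int × Int)))
    (cell : Int × Int) :
    PySem.Dict (Int × Int) (Int × Int) × PySem.Dict (Int × Int) (List (Int × Int)) :=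
  (st.1.insert cell target, st.2.insert target (st.2.getD target [] ++ [cell]))

def pvMerge (target : Int × Int)
    (st : PySem.Dict (Int × Int) (Int × Int) × PySem.Dict (Int × Int) (List (Int × Int)))
    (other : Int × Int) :
    PySem.Dict (Int × Int) (Int × Int) × PySem.Dict (Int × Int) (List (Int × Int)) :=
  let m := (st.2.get? other).getD []   -- members.pop(other); present under the loop invariant (Python raises KeyError otherwise)
  m.foldl (pvRelabel target) (st.1, st.2.erase other)

-- one grid cell of the scan
def pvBodyAlt (grid : List Int) (width : Int)
    (st : PySem.Dict (Int × Int) (Int × Int) × PySem.Dict (Int × Int) (List (Int × Int)))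
    (p : Int × Int) :
    PySem.Dict (Int × Int) (Int × Int) × PySem.Dict (Int × Int) (List (Int × Int)) :=
  if pvTestBit (PySem.List.pyGetD grid p.1 0) (width - 1 - p.2) then st
  else
    match pvLabels st.1 p with
    | [] =>
        let members := st.2.insert p ([] : List (Int × Int))
        (st.1.insert p p, members.insert p (members.getD p [] ++ [p]))
    | target :: rest =>
        let st2 := rest.foldl (pvMerge target) st
        (st2.1.insert p target, st2.2.insert target (st2.2.getD target [] ++ [p]))

def is_space_sufficient_alt (grid : List Int) (width : Int) (height : Int) (required_area : Int) (min_item_area : Int) (slack : Int) : Bool :=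
  let free_area := width * height - pvUsedArea grid
  if free_area < required_area then false
  else if free_area > required_area + slack then true
  else
    let st := (PySem.List.pyRange 0 height).foldl (fun st r =>
        (PySem.List.pyRange 0 width).foldl (fun st c =>
          pvBodyAlt grid width st (r, c)) st)
      (PySem.Dict.empty, PySem.Dict.empty)
    decide ((st.2.values.foldl (fun s cells =>
        if (cells.length : Int) ≥ min_item_area then s + (cells.length : Int) else s) 0) ≥ required_area)

-- ===== PRECONDITION & SPEC =====
-- Pre_ excludes exactly the inputs on which Python A raises IndexError: those where the slow
-- (connectivity) path is reached (neither guard fires) while height exceeds len(grid).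
def Pre_is_space_sufficient (grid : List Int) (width : Int) (height : Int) (required_area : Int) (min_item_area : Int) (slack : Int) : Prop :=
  width * height - pvUsedArea grid < required_area ∨
  required_area + slack < width * height - pvUsedArea grid ∨
  height ≤ (grid.length : Int)
instance (grid : List Int) (width : Int) (height : Int) (required_area : Int) (min_item_area : Int) (slack : Int) : Decidable (Pre_is_space_sufficient grid width height required_area min_item_area slack) := by unfold Pre_is_space_sufficient; infer_instance

def pvWitness_is_space_sufficient : List Int × Int × Int × Int × Int × Int := ([0], 1, 1, 1, 1, 20)

def Spec_is_space_sufficient (grid : List Int) (width : Int) (height : Int) (required_area : Int) (min_item_area : Int) (slack : Int) (out : Bool) : Prop := out = is_space_sufficient_alt grid width height required_area min_item_area slack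
instance (grid : List Int) (width : Int) (height : Int) (required_area : Int) (min_item_area : Int) (slack : Int) (out : Bool) : Decidable (Spec_is_space_sufficient grid width height required_area min_item_area slack out) := by unfold Spec_is_space_sufficient; infer_instance

-- ===== CLAIM (what is proved, stated in full; the proofs are below) =====
def Claim_equal_is_space_sufficient : Prop := ∀ (grid : List Int) (width : Int) (height : Int) (required_area : Int) (min_item_area : Int) (slack : Int), Dom_is_space_sufficient grid width height required_area min_item_area slack → Pre_is_space_sufficient grid width height required_area min_item_area slack → Spec_is_space_sufficient grid width height required_area min_item_area slack (is_space_sufficient grid width height required_area min_item_area slack)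

-- ===== LEMMAS AND PROOFS =====

-- ===== LEMMAS AND PROOFS =====

-- proof-side vocabulary -------------------------------------------------------------
def pvInB (height width : Int) (p : Int × Int) : Bool :=
  decide (0 ≤ p.1 ∧ p.1 < height ∧ 0 ≤ p.2 ∧ p.2 < width)

def pvFreeC (occ : Int × Int → Bool) (height width : Int) (p : Int × Int) : Bool :=
  pvInB height width p && !occ p

def pvAdj (occ : Int × Int → Bool) (height width : Int) (p q : Int × Int) : Prop :=
  pvFreeC occ height width p = true ∧ pvFreeC occ height width q = true ∧ q ∈ pvNbrs p

def pvR (occ : Int × Int → Bool) (height width : Int) : Int × Int → Int × Int → Prop :=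
  Relation.ReflTransGen (pvAdj occ height width)

def pvOccB (grid : List Int) (width : Int) : Int × Int → Bool :=
  fun p => pvTestBit (PySem.List.pyGetD grid p.1 0) (width - 1 - p.2)

def pvRegion (occ : Int × Int → Bool) (height width : Int) (s : Int × Int) : List (Int × Int) :=
  (pvBfsLoop occ height width (height.toNat * width.toNat + 1)
      (PySem.Set.ofList [s]) [s] 0 0).2.1

def pvBig (occ : Int × Int → Bool) (height width min_item_area : Int) (p : Int × Int) : Bool :=
  decide (((pvRegion occ height width p).length : Int) ≥ min_item_area)

def pvCells (height width : Int) : List (Int × Int) :=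
  (PySem.List.pyRange 0 height).flatMap fun r => (PySem.List.pyRange 0 width).map fun c => (r, c)

def pvCollision (grid : List Int) (width height : Int) : PySem.Set (Int × Int) :=
  (PySem.List.pyRange 0 height).foldl (fun col r =>
    let row_val := PySem.List.pyGetD grid r 0
    if row_val == 0 then col
    else (PySem.List.pyRange 0 width).foldl (fun col c =>
      if pvTestBit row_val (width - 1 - c) then PySem.Set.add col (r, c) else col) col)
    (PySem.Set.ofList [])

def pvBodyA (grid : List Int) (width height required_area min_item_area : Int)
    (st : Option (PySem.Set (Int × Int) × Int)) (x : Int × Int) :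
    Option (PySem.Set (Int × Int) × Int) :=
  match st with
  | none => none
  | some (visited, usable) =>
    if PySem.Set.contains (pvCollision grid width height) x = false ∧ PySem.Set.contains visited x = false then
      let out := pvBfsLoop (fun p => PySem.Set.contains (pvCollision grid width height) p) height width
        (height.toNat * width.toNat + 1) (PySem.Set.add visited x) [x] 0 0
      let usable' := if out.2.2 ≥ min_item_area then usable + out.2.2 else usable
      if usable' ≥ required_area then none else some (out.1, usable')
    else st

-- basic facts -----------------------------------------------------------------------
lemma pvTestBit_zero (k : Int) : pvTestBit 0 k = false := by
  have h0 : (0 : Int) >>> k.toNat = 0 := by simp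
  rw [pvTestBit, h0]
  decide


lemma pvNbrs_symm {p q : Int × Int} (h : q ∈ pvNbrs p) : p ∈ pvNbrs q := by
  obtain ⟨a, b⟩ := p; obtain ⟨c, d⟩ := q
  simp [pvNbrs, Prod.ext_iff] at h ⊢
  omega

lemma pvAdj_symm (occ : Int × Int → Bool) (height width : Int) :
    Symmetric (pvAdj occ height width) := by
  rintro p q ⟨hp, hq, hn⟩; exact ⟨hq, hp, pvNbrs_symm hn⟩

lemma pvR_symm {occ : Int × Int → Bool} {height width : Int} {p q : Int × Int}
    (h : pvR occ height width p q) : pvR occ height width q p :=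
  Relation.ReflTransGen.symmetric (pvAdj_symm occ height width) h

lemma pvR_free {occ : Int × Int → Bool} {height width : Int} {s p : Int × Int}
    (hs : pvFreeC occ height width s = true) (h : pvR occ height width s p) :
    pvFreeC occ height width p = true := by
  induction h with
  | refl => exact hs
  | tail _ hadj _ => exact hadj.2.1

lemma pvNodup_inB_length {height width : Int} (l : List (Int × Int)) (hnd : l.Nodup)
    (hin : ∀ p ∈ l, pvInB height width p = true) :
    l.length ≤ height.toNat * width.toNat := by
  have hin' : ∀ p ∈ l, 0 ≤ p.1 ∧ p.1 < height ∧ 0 ≤ p.2 ∧ p.2 < width := by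
    intro p hp; have := hin p hp; simpa [pvInB] using this
  set f : Int × Int → Nat × Nat := fun p => (p.1.toNat, p.2.toNat) with hf
  have hmapnd : (l.map f).Nodup := by
    refine hnd.map_on ?_
    intro x hx y hy hxy
    have hx' := hin' x hx; have hy' := hin' y hy
    have h1 : x.1.toNat = y.1.toNat ∧ x.2.toNat = y.2.toNat := by
      simpa [hf, Prod.ext_iff] using hxy
    have : x.1 = y.1 ∧ x.2 = y.2 := by omega
    exact Prod.ext this.1 this.2
  have hsub : (l.map f).toFinset ⊆ Finset.range height.toNat ×ˢ Finset.range width.toNat := by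
    intro x hx
    simp only [List.mem_toFinset, List.mem_map] at hx
    obtain ⟨p, hp, rfl⟩ := hx
    have := hin' p hp
    simp only [Finset.mem_product, Finset.mem_range, hf]
    omega
  calc l.length = (l.map f).length := by simp
    _ = (l.map f).toFinset.card := (List.toFinset_card_of_nodup hmapnd).symm
    _ ≤ (Finset.range height.toNat ×ˢ Finset.range width.toNat).card := Finset.card_le_card hsub
    _ = height.toNat * width.toNat := by simp [Finset.card_product]

-- a set containing the seed and closed under free neighbours contains the whole class
lemma pvClosed_reach {occ : Int × Int → Bool} {height width : Int} (S : List (Int × Int))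
    (seed : Int × Int) (hseed : seed ∈ S)
    (hcl : ∀ p ∈ S, ∀ n ∈ pvNbrs p, pvFreeC occ height width n = true → n ∈ S) :
    ∀ p, pvR occ height width seed p → p ∈ S := by
  intro p hp
  induction hp with
  | refl => exact hseed
  | tail _ hadj ih => exact hcl _ ih _ hadj.2.2 hadj.2.1

lemma pvStep_fold (occ : Int × Int → Bool) (height width : Int) (seed c0 : Int × Int)
    (P : Int × Int → Prop)
    (hdisj : ∀ p, pvR occ height width seed p → ¬ P p)
    (hc0F : pvFreeC occ height width c0 = true)
    (hc0R : pvR occ height width seed c0) :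
    ∀ (ns : List (Int × Int)) (v : PySem.Set (Int × Int)) (q : List (Int × Int)),
    (∀ n ∈ ns, n ∈ pvNbrs c0) →
    q.Nodup → (∀ p ∈ q, pvR occ height width seed p) → List.Nodup v →
    (∀ p, PySem.Set.contains v p = true ↔ (P p ∨ p ∈ q)) →
    ∃ ext, (ns.foldl (pvStep occ height width) (v, q)).2 = q ++ ext ∧
      (ns.foldl (pvStep occ height width) (v, q)).2.Nodup ∧
      (∀ p ∈ (ns.foldl (pvStep occ height width) (v, q)).2, pvR occ height width seed p) ∧
      List.Nodup (ns.foldl (pvStep occ height width) (v, q)).1 ∧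
      (∀ p, PySem.Set.contains (ns.foldl (pvStep occ height width) (v, q)).1 p = true ↔
        (P p ∨ p ∈ (ns.foldl (pvStep occ height width) (v, q)).2)) ∧
      (∀ n ∈ ns, pvFreeC occ height width n = true →
        n ∈ (ns.foldl (pvStep occ height width) (v, q)).2) := by
  intro ns
  induction ns with
  | nil =>
    intro v q _ hqnd hqR hvnd hv
    exact ⟨[], by simp, by simpa using hqnd, by simpa using hqR, hvnd, hv, by simp⟩
  | cons n ns ih =>
    intro v q hns hqnd hqR hvnd hv
    have hnmem : n ∈ pvNbrs c0 := hns n (List.mem_cons_self)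
    simp only [List.foldl_cons]
    by_cases hin : 0 ≤ n.1 ∧ n.1 < height ∧ 0 ≤ n.2 ∧ n.2 < width
    · by_cases hocc : occ n = false
      · by_cases hcont : PySem.Set.contains v n = false
        · have hstep : pvStep occ height width (v, q) n = (PySem.Set.add v n, q ++ [n]) := by
            rw [pvStep]; rw [if_pos hin]; rw [if_pos ⟨hocc, hcont⟩]
          rw [hstep]
          have hnF : pvFreeC occ height width n = true := by
            simp [pvFreeC, pvInB, hin, hocc]
          have hnR : pvR occ height width seed n := hc0R.tail ⟨hc0F, hnF, hnmem⟩
          have hnq : n ∉ q := by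
            intro hmem
            have := (hv n).mpr (Or.inr hmem)
            rw [hcont] at this; exact Bool.false_ne_true this
          have hqnd' : (q ++ [n]).Nodup := by
            refine hqnd.append (List.nodup_singleton n) ?_
            rw [List.disjoint_left]
            intro a ha han
            exact hnq ((List.mem_singleton.mp han) ▸ ha)
          have hqR' : ∀ p ∈ q ++ [n], pvR occ height width seed p := by
            intro p hp
            rcases List.mem_append.mp hp with h | h
            · exact hqR p h
            · rw [List.mem_singleton.mp h]; exact hnR
          have hvnd' : List.Nodup (PySem.Set.add v n) := PySem.Set.nodup_add v n hvnd
          have hv' : ∀ p, PySem.Set.contains (PySem.Set.add v n) p = true ↔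
              (P p ∨ p ∈ q ++ [n]) := by
            intro p
            rw [PySem.Set.contains_iff, PySem.Set.mem_add]
            constructor
            · rintro (hm | rfl)
              · rcases (hv p).mp ((PySem.Set.contains_iff _ _).mpr hm) with h | h
                · exact Or.inl h
                · exact Or.inr (List.mem_append.mpr (Or.inl h))
              · exact Or.inr (List.mem_append.mpr (Or.inr (List.mem_singleton.mpr rfl)))
            · rintro (h | h)
              · exact Or.inl ((PySem.Set.contains_iff _ _).mp ((hv p).mpr (Or.inl h)))
              · rcases List.mem_append.mp h with h | h
                · exact Or.inl ((PySem.Set.contains_iff _ _).mp ((hv p).mpr (Or.inr h)))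
                · exact Or.inr (List.mem_singleton.mp h)
          obtain ⟨ext, he, h1, h2, h3, h4, h5⟩ :=
            ih (PySem.Set.add v n) (q ++ [n]) (fun m hm => hns m (List.mem_cons_of_mem _ hm))
              hqnd' hqR' hvnd' hv'
          refine ⟨n :: ext, ?_, h1, h2, h3, h4, ?_⟩
          · rw [he, List.append_assoc]; rfl
          · intro m hm hmF
            rcases List.mem_cons.mp hm with rfl | hm'
            · rw [he]; exact List.mem_append.mpr (Or.inl (List.mem_append.mpr (Or.inr (List.mem_singleton.mpr rfl))))
            · exact h5 m hm' hmF
        · have hstep : pvStep occ height width (v, q) n = (v, q) := by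
            rw [pvStep]; rw [if_pos hin]; rw [if_neg (by tauto)]
          rw [hstep]
          have hnF : pvFreeC occ height width n = true := by
            simp [pvFreeC, pvInB, hin, hocc]
          have hnR : pvR occ height width seed n := hc0R.tail ⟨hc0F, hnF, hnmem⟩
          have hnq : n ∈ q := by
            have hc : PySem.Set.contains v n = true := by
              cases h : PySem.Set.contains v n
              · exact absurd h hcont
              · rfl
            rcases (hv n).mp hc with h | h
            · exact absurd h (hdisj n hnR)
            · exact h
          obtain ⟨ext, he, h1, h2, h3, h4, h5⟩ :=
            ih v q (fun m hm => hns m (List.mem_cons_of_mem _ hm)) hqnd hqR hvnd hv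
          refine ⟨ext, he, h1, h2, h3, h4, ?_⟩
          intro m hm hmF
          rcases List.mem_cons.mp hm with rfl | hm'
          · rw [he]; exact List.mem_append.mpr (Or.inl hnq)
          · exact h5 m hm' hmF
      · have hstep : pvStep occ height width (v, q) n = (v, q) := by
          rw [pvStep]; rw [if_pos hin]; rw [if_neg (by tauto)]
        rw [hstep]
        obtain ⟨ext, he, h1, h2, h3, h4, h5⟩ :=
          ih v q (fun m hm => hns m (List.mem_cons_of_mem _ hm)) hqnd hqR hvnd hv
        refine ⟨ext, he, h1, h2, h3, h4, ?_⟩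
        intro m hm hmF
        rcases List.mem_cons.mp hm with rfl | hm'
        · exact absurd hmF (by simp [pvFreeC]; intro _; simpa using hocc)
        · exact h5 m hm' hmF
    · have hstep : pvStep occ height width (v, q) n = (v, q) := by
        rw [pvStep]; rw [if_neg hin]
      rw [hstep]
      obtain ⟨ext, he, h1, h2, h3, h4, h5⟩ :=
        ih v q (fun m hm => hns m (List.mem_cons_of_mem _ hm)) hqnd hqR hvnd hv
      refine ⟨ext, he, h1, h2, h3, h4, ?_⟩
      intro m hm hmF
      rcases List.mem_cons.mp hm with rfl | hm'
      · exact absurd hmF (by simp [pvFreeC, pvInB]; intro h; omega)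
      · exact h5 m hm' hmF


-- the BFS queue loop computes exactly the connected free region of its seed
lemma pvBfs_grand (occ : Int × Int → Bool) (height width : Int) (seed : Int × Int)
    (P : Int × Int → Prop)
    (hseedF : pvFreeC occ height width seed = true)
    (hdisj : ∀ p, pvR occ height width seed p → ¬ P p) :
    ∀ (fuel : Nat) (v : PySem.Set (Int × Int)) (q : List (Int × Int)) (idx : Nat) (size : Int),
    q.Nodup → seed ∈ q → (∀ p ∈ q, pvR occ height width seed p) →
    List.Nodup v →
    (∀ p, PySem.Set.contains v p = true ↔ (P p ∨ p ∈ q)) →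
    idx ≤ q.length → size = (idx : Int) →
    (∀ p ∈ q.take idx, ∀ n ∈ pvNbrs p, pvFreeC occ height width n = true → n ∈ q) →
    height.toNat * width.toNat + 1 ≤ fuel + idx →
    ∃ v' q', pvBfsLoop occ height width fuel v q idx size = (v', q', (q'.length : Int)) ∧
      q'.Nodup ∧ List.Nodup v' ∧ (∀ p, p ∈ q' ↔ pvR occ height width seed p) ∧
      (∀ p, PySem.Set.contains v' p = true ↔ (P p ∨ p ∈ q')) := by
  intro fuel
  induction fuel with
  | zero =>
    intro v q idx size hqnd _ hqR _ _ hidx _ _ hfuel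
    exfalso
    have hbound : q.length ≤ height.toNat * width.toNat :=
      pvNodup_inB_length q hqnd (fun p hp => by
        have := pvR_free hseedF (hqR p hp)
        simp only [pvFreeC, Bool.and_eq_true] at this
        exact this.1)
    omega
  | succ fuel ih =>
    intro v q idx size hqnd hseedq hqR hvnd hv hidx hsize htake hfuel
    cases hq : q[idx]? with
    | none =>
      have hlen : q.length ≤ idx := List.getElem?_eq_none_iff.mp hq
      have hidx' : idx = q.length := le_antisymm hlen hidx |>.symm
      have htakeall : q.take idx = q := List.take_of_length_le hlen
      refine ⟨v, q, ?_, hqnd, hvnd, ?_, hv⟩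
      · simp only [pvBfsLoop, hq]
        rw [hsize, hidx']
      · intro p
        constructor
        · exact hqR p
        · exact fun h => pvClosed_reach q seed hseedq
            (fun p' hp' => htake p' (by rw [htakeall]; exact hp')) p h
    | some c0 =>
      obtain ⟨hlt, hc0⟩ := List.getElem?_eq_some_iff.mp hq
      have hc0mem : c0 ∈ q := hc0 ▸ List.getElem_mem hlt
      have hc0R : pvR occ height width seed c0 := hqR c0 hc0mem
      have hc0F : pvFreeC occ height width c0 = true := pvR_free hseedF hc0R
      obtain ⟨ext, he, h1, h2, h3, h4, h5⟩ :=
        pvStep_fold occ height width seed c0 P hdisj hc0F hc0R (pvNbrs c0) v q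
          (fun _ hn => hn) hqnd hqR hvnd hv
      set st := (pvNbrs c0).foldl (pvStep occ height width) (v, q) with hst
      have hres : pvBfsLoop occ height width (fuel + 1) v q idx size
          = pvBfsLoop occ height width fuel st.1 st.2 (idx + 1) (size + 1) := by
        simp only [pvBfsLoop, hq]
        rw [hst]
      rw [hres]
      have hidx1 : idx + 1 ≤ st.2.length := by
        rw [he, List.length_append]; omega
      have htake1 : ∀ p ∈ st.2.take (idx + 1), ∀ n ∈ pvNbrs p,
          pvFreeC occ height width n = true → n ∈ st.2 := by
        intro p hp n hn hnF
        rw [he, List.take_append_of_le_length (by omega)] at hp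
        rw [List.take_add_one, hq] at hp
        rcases List.mem_append.mp hp with hp' | hp'
        · have := htake p hp' n hn hnF
          rw [he]; exact List.mem_append.mpr (Or.inl this)
        · have hpc : p = c0 := by simpa using hp'
          subst hpc
          exact h5 n hn hnF
      have hseedq' : seed ∈ st.2 := by rw [he]; exact List.mem_append.mpr (Or.inl hseedq)
      have hsize1 : size + 1 = ((idx + 1 : Nat) : Int) := by rw [hsize]; push_cast; ring
      obtain ⟨v', q', heq, c1, c2, c3, c4⟩ :=
        ih st.1 st.2 (idx + 1) (size + 1) h1 hseedq' h2 h3 h4 hidx1 hsize1 htake1 (by omega)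
      exact ⟨v', q', heq, c1, c2, c3, c4⟩

lemma pvBfs_run (occ : Int × Int → Bool) (height width : Int) (seed : Int × Int)
    (P : Int × Int → Prop) (v0 : PySem.Set (Int × Int))
    (hseedF : pvFreeC occ height width seed = true)
    (hdisj : ∀ p, pvR occ height width seed p → ¬ P p)
    (hnd : List.Nodup v0)
    (hv0 : ∀ p, PySem.Set.contains v0 p = true ↔ (P p ∨ p = seed)) :
    ∃ v' q', pvBfsLoop occ height width (height.toNat * width.toNat + 1) v0 [seed] 0 0
        = (v', q', (q'.length : Int)) ∧
      q'.Nodup ∧ List.Nodup v' ∧ (∀ p, p ∈ q' ↔ pvR occ height width seed p) ∧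
      (∀ p, PySem.Set.contains v' p = true ↔ (P p ∨ p ∈ q')) := by
  refine pvBfs_grand occ height width seed P hseedF hdisj _ v0 [seed] 0 0
    (List.nodup_singleton seed) (List.mem_singleton.mpr rfl) ?_ hnd ?_ (by simp) (by simp)
    (by simp) (by omega)
  · intro p hp
    rw [List.mem_singleton.mp hp]
    exact Relation.ReflTransGen.refl
  · intro p
    rw [hv0 p]
    simp

lemma pvRegion_spec (occ : Int × Int → Bool) (height width : Int) (s : Int × Int)
    (hs : pvFreeC occ height width s = true) :
    (pvRegion occ height width s).Nodup ∧
      (∀ p, p ∈ pvRegion occ height width s ↔ pvR occ height width s p) := by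
  obtain ⟨v', q', heq, c1, _, c3, _⟩ :=
    pvBfs_run occ height width s (fun _ => False) (PySem.Set.ofList [s]) hs
      (by intro p _; exact not_false) (PySem.Set.nodup_ofList _)
      (by intro p
          rw [PySem.Set.contains_iff, PySem.Set.mem_ofList]
          simp)
  rw [pvRegion, heq]
  exact ⟨c1, c3⟩

lemma pvRegion_len_congr {occ : Int × Int → Bool} {height width : Int} {a b : Int × Int}
    (ha : pvFreeC occ height width a = true) (hR : pvR occ height width a b) :
    (pvRegion occ height width a).length = (pvRegion occ height width b).length := by
  have hb : pvFreeC occ height width b = true := pvR_free ha hR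
  obtain ⟨nda, mema⟩ := pvRegion_spec occ height width a ha
  obtain ⟨ndb, memb⟩ := pvRegion_spec occ height width b hb
  have hperm : (pvRegion occ height width a).Perm (pvRegion occ height width b) := by
    rw [List.perm_ext_iff_of_nodup nda ndb]
    intro p
    rw [mema p, memb p]
    constructor
    · exact fun h => (pvR_symm hR).trans h
    · exact fun h => hR.trans h
  exact hperm.length_eq

lemma colInner (width r rv : Int) :
    ∀ (cs : List Int) (col : PySem.Set (Int × Int)) (p : Int × Int),
    (PySem.Set.contains (cs.foldl (fun col c =>
        if pvTestBit rv (width - 1 - c) then PySem.Set.add col (r, c) else col) col) p = true)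
    ↔ (PySem.Set.contains col p = true ∨
        (p.1 = r ∧ p.2 ∈ cs ∧ pvTestBit rv (width - 1 - p.2) = true)) := by
  intro cs
  induction cs with
  | nil => simp
  | cons c cs ih =>
    intro col p
    obtain ⟨a, b⟩ := p
    simp only [List.foldl_cons]
    rw [ih]
    by_cases hb : pvTestBit rv (width - 1 - c) = true
    · simp only [hb, if_pos, PySem.Set.contains_iff, PySem.Set.mem_add, List.mem_cons,
        Prod.mk.injEq]
      constructor
      · rintro (⟨h | ⟨rfl, rfl⟩⟩ | h)
        · exact Or.inl (by simpa [PySem.Set.contains_iff] using h)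
        · exact Or.inr ⟨rfl, Or.inl rfl, hb⟩
        · exact Or.inr ⟨h.1, Or.inr h.2.1, h.2.2⟩
      · rintro (h | ⟨rfl, (rfl | hmem), ht⟩)
        · exact Or.inl (Or.inl (by simpa [PySem.Set.contains_iff] using h))
        · exact Or.inl (Or.inr ⟨rfl, rfl⟩)
        · exact Or.inr ⟨rfl, hmem, ht⟩
    · simp only [hb, if_neg, Bool.not_eq_true, List.mem_cons]
      constructor
      · rintro (h | h)
        · exact Or.inl h
        · exact Or.inr ⟨h.1, Or.inr h.2.1, h.2.2⟩
      · rintro (h | ⟨rfl, (rfl | hmem), ht⟩)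
        · exact Or.inl h
        · exact absurd ht hb
        · exact Or.inr ⟨rfl, hmem, ht⟩

lemma colOuter (grid : List Int) (width : Int) :
    ∀ (rs : List Int) (col : PySem.Set (Int × Int)) (p : Int × Int),
    (PySem.Set.contains (rs.foldl (fun col r =>
        let row_val := PySem.List.pyGetD grid r 0
        if row_val == 0 then col
        else (PySem.List.pyRange 0 width).foldl (fun col c =>
          if pvTestBit row_val (width - 1 - c) then PySem.Set.add col (r, c) else col) col) col) p = true)
    ↔ (PySem.Set.contains col p = true ∨
        (p.1 ∈ rs ∧ 0 ≤ p.2 ∧ p.2 < width ∧ pvOccB grid width p = true)) := by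
  intro rs
  induction rs with
  | nil => simp
  | cons r rs ih =>
    intro col p
    simp only [List.foldl_cons]
    by_cases h0 : PySem.List.pyGetD grid r 0 == 0
    · rw [if_pos h0, ih]
      have hz : PySem.List.pyGetD grid r 0 = 0 := by simpa using h0
      constructor
      · rintro (h | h)
        · exact Or.inl h
        · exact Or.inr ⟨List.mem_cons_of_mem _ h.1, h.2⟩
      · rintro (h | ⟨hmem, h1, h2, ht⟩)
        · exact Or.inl h
        · rcases List.mem_cons.mp hmem with rfl | hmem'
          · exact absurd ht (by simp [pvOccB, hz, pvTestBit_zero])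
          · exact Or.inr ⟨hmem', h1, h2, ht⟩
    · rw [if_neg h0, ih, colInner]
      constructor
      · rintro ((h | ⟨h1, h2, ht⟩) | h)
        · exact Or.inl h
        · have h2' := (PySem.List.mem_pyRange_one).mp h2
          exact Or.inr ⟨by simp [h1], h2'.1, h2'.2, by simpa [pvOccB, h1] using ht⟩
        · exact Or.inr ⟨List.mem_cons_of_mem _ h.1, h.2⟩
      · rintro (h | ⟨hmem, h1, h2, ht⟩)
        · exact Or.inl (Or.inl h)
        · rcases List.mem_cons.mp hmem with hr | hmem'
          · exact Or.inl (Or.inr ⟨hr, (PySem.List.mem_pyRange_one).mpr ⟨h1, h2⟩,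
              by simpa [pvOccB, hr] using ht⟩)
          · exact Or.inr ⟨hmem', h1, h2, ht⟩

-- the collision set holds exactly the in-bounds cells whose bit is set
lemma pvCollision_mem (grid : List Int) (width height : Int) (p : Int × Int) :
    PySem.Set.contains (pvCollision grid width height) p = true ↔
      (pvInB height width p = true ∧ pvOccB grid width p = true) := by
  rw [pvCollision, colOuter]
  simp [PySem.List.mem_pyRange_one, pvInB]
  tauto

lemma pvFree_colA_eq (grid : List Int) (width height : Int) (p : Int × Int) :
    pvFreeC (fun p => PySem.Set.contains (pvCollision grid width height) p) height width p
      = pvFreeC (pvOccB grid width) height width p := by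
  by_cases hin : pvInB height width p = true
  · by_cases hocc : pvOccB grid width p = true
    · have : PySem.Set.contains (pvCollision grid width height) p = true :=
        (pvCollision_mem grid width height p).mpr ⟨hin, hocc⟩
      have hm := (PySem.Set.contains_iff _ _).mp this
      simp [pvFreeC, hin, hocc, hm]
    · simp only [Bool.not_eq_true] at hocc
      have hm : p ∉ pvCollision grid width height := by
        intro hmem
        have h2 := (pvCollision_mem grid width height p).mp ((PySem.Set.contains_iff _ _).mpr hmem)
        simp [hocc] at h2
      simp [pvFreeC, hin, hocc, hm]
  · simp only [Bool.not_eq_true] at hin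
    simp [pvFreeC, hin]

lemma pvAdj_colA_iff (grid : List Int) (width height : Int) (p q : Int × Int) :
    pvAdj (fun p => PySem.Set.contains (pvCollision grid width height) p) height width p q
      ↔ pvAdj (pvOccB grid width) height width p q := by
  unfold pvAdj
  rw [pvFree_colA_eq, pvFree_colA_eq]

lemma pvR_colA_iff (grid : List Int) (width height : Int) (p q : Int × Int) :
    pvR (fun p => PySem.Set.contains (pvCollision grid width height) p) height width p q
      ↔ pvR (pvOccB grid width) height width p q := by
  constructor
  · exact Relation.ReflTransGen.mono (fun a b h => (pvAdj_colA_iff grid width height a b).mp h)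
  · exact Relation.ReflTransGen.mono (fun a b h => (pvAdj_colA_iff grid width height a b).mpr h)

lemma mem_pvCells {height width : Int} {p : Int × Int} :
    p ∈ pvCells height width ↔ pvInB height width p = true := by
  obtain ⟨a, b⟩ := p
  simp [pvCells, List.mem_flatMap, List.mem_map, PySem.List.mem_pyRange_one, pvInB, Prod.ext_iff]
  omega

lemma nodup_pvCells (height width : Int) : (pvCells height width).Nodup := by
  rw [pvCells, List.nodup_flatMap]
  constructor
  · intro r _
    exact (PySem.List.nodup_pyRange_one 0 width).map_on (by intro x _ y _ h; simpa [Prod.ext_iff] using h)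
  · refine List.Pairwise.imp ?_ ((PySem.List.nodup_pyRange_one 0 height) : (PySem.List.pyRange 0 height).Pairwise (· ≠ ·))
    intro a b hab x hx hy
    simp only [List.mem_map] at hx hy
    obtain ⟨c1, _, rfl⟩ := hx
    obtain ⟨c2, _, h2⟩ := hy
    exact hab (by simp [Prod.ext_iff] at h2; exact h2.1.symm)

lemma pvA_none (grid : List Int) (width height required_area min_item_area : Int) :
    ∀ (l : List (Int × Int)),
    l.foldl (pvBodyA grid width height required_area min_item_area) none = none := by
  intro l
  induction l with
  | nil => rfl
  | cons x l ih => simpa [pvBodyA] using ih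

lemma pvCountP_le (p : (Int × Int) → Bool) {l₁ l₂ : List (Int × Int)} (hnd : l₁.Nodup)
    (hsub : l₁ ⊆ l₂) : List.countP p l₁ ≤ List.countP p l₂ :=
  (hnd.subperm hsub).countP_le p

lemma pvTotal_eq (grid : List Int) (width height min_item_area : Int)
    (v : List (Int × Int)) (hnd : v.Nodup)
    (hmem : ∀ p, p ∈ v ↔ pvFreeC (pvOccB grid width) height width p = true) :
    List.countP (pvBig (pvOccB grid width) height width min_item_area) v
      = List.countP (fun p => pvFreeC (pvOccB grid width) height width p &&
          pvBig (pvOccB grid width) height width min_item_area p) (pvCells height width) := by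
  have hperm : v.Perm ((pvCells height width).filter (pvFreeC (pvOccB grid width) height width)) := by
    rw [List.perm_ext_iff_of_nodup hnd ((nodup_pvCells height width).filter _)]
    intro p
    rw [hmem p, List.mem_filter, mem_pvCells]
    constructor
    · intro h
      refine ⟨?_, h⟩
      have := h
      simp only [pvFreeC, Bool.and_eq_true] at this
      exact this.1
    · exact fun h => h.2
  rw [hperm.countP_eq, List.countP_filter]
  refine List.countP_congr ?_
  intro x _
  simp [Bool.and_comm]

lemma pvA_loop (grid : List Int) (width height required_area min_item_area : Int) :
    ∀ (rest : List (Int × Int)), (∀ x ∈ rest, pvInB height width x = true) →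
    ∀ (v : PySem.Set (Int × Int)) (u : Int),
    List.Nodup v →
    (∀ p, PySem.Set.contains v p = true → pvFreeC (pvOccB grid width) height width p = true) →
    (∀ p p', PySem.Set.contains v p = true → pvR (pvOccB grid width) height width p p' →
        PySem.Set.contains v p' = true) →
    u = (List.countP (pvBig (pvOccB grid width) height width min_item_area) v : Int) →
    (∀ p, pvFreeC (pvOccB grid width) height width p = true →
        p ∈ rest ∨ PySem.Set.contains v p = true) →
    (match rest.foldl (pvBodyA grid width height required_area min_item_area) (some (v, u)) with
      | none => true
      | some (_, usable) => decide (usable ≥ required_area))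
    = decide ((List.countP
        (fun p => pvFreeC (pvOccB grid width) height width p &&
          pvBig (pvOccB grid width) height width min_item_area p)
        (pvCells height width) : Int) ≥ required_area) := by
  intro rest
  induction rest with
  | nil =>
    intro _ v u hnd hv1 _ hu hcov
    simp only [List.foldl_nil]
    have hmem : ∀ p, p ∈ v ↔ pvFreeC (pvOccB grid width) height width p = true := by
      intro p
      constructor
      · exact fun h => hv1 p ((PySem.Set.contains_iff _ _).mpr h)
      · intro h
        rcases hcov p h with h' | h'
        · exact absurd h' (List.not_mem_nil)
        · exact (PySem.Set.contains_iff _ _).mp h'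
    rw [hu, pvTotal_eq grid width height min_item_area v hnd hmem]
  | cons x rest ih =>
    intro hrest v u hnd hv1 hv2 hu hcov
    have hxin : pvInB height width x = true := hrest x List.mem_cons_self
    have hrest' : ∀ y ∈ rest, pvInB height width y = true :=
      fun y hy => hrest y (List.mem_cons_of_mem _ hy)
    simp only [List.foldl_cons]
    by_cases hfree : pvFreeC (pvOccB grid width) height width x = true
    · by_cases hcont : PySem.Set.contains v x = true
      · have hstep : pvBodyA grid width height required_area min_item_area (some (v, u)) x
            = some (v, u) := by
          simp only [pvBodyA]
          rw [if_neg (by rw [hcont]; simp)]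
        rw [hstep]
        refine ih hrest' v u hnd hv1 hv2 hu ?_
        intro p hp
        rcases hcov p hp with h' | h'
        · rcases List.mem_cons.mp h' with rfl | h''
          · exact Or.inr hcont
          · exact Or.inl h''
        · exact Or.inr h'
      · have hcolf : PySem.Set.contains (pvCollision grid width height) x = false := by
          cases hc : PySem.Set.contains (pvCollision grid width height) x
          · rfl
          · exfalso
            have hthis := (pvCollision_mem grid width height x).mp hc
            have hocc : pvOccB grid width x = false := by
              simp only [pvFreeC, Bool.and_eq_true, Bool.not_eq_true'] at hfree
              exact hfree.2
            rw [hocc] at hthis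
            exact Bool.false_ne_true hthis.2
        have hcontf : PySem.Set.contains v x = false := by
          cases hc : PySem.Set.contains v x
          · rfl
          · exact absurd hc hcont
        have hfreeA : pvFreeC (fun p => PySem.Set.contains (pvCollision grid width height) p)
            height width x = true := by
          rw [pvFree_colA_eq]; exact hfree
        have hdisj : ∀ p, pvR (fun p => PySem.Set.contains (pvCollision grid width height) p)
            height width x p → ¬ (PySem.Set.contains v p = true) := by
          intro p hR hvp
          exact hcont (hv2 p x hvp (pvR_symm ((pvR_colA_iff grid width height x p).mp hR)))
        obtain ⟨v', q', heq, qnd', vnd', hqmem, hv'⟩ :=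
          pvBfs_run (fun p => PySem.Set.contains (pvCollision grid width height) p)
            height width x (fun p => PySem.Set.contains v p = true) (PySem.Set.add v x)
            hfreeA hdisj (PySem.Set.nodup_add v x hnd)
            (by intro p
                rw [PySem.Set.contains_iff, PySem.Set.mem_add]
                constructor
                · rintro (h | rfl)
                  · exact Or.inl ((PySem.Set.contains_iff _ _).mpr h)
                  · exact Or.inr rfl
                · rintro (h | rfl)
                  · exact Or.inl ((PySem.Set.contains_iff _ _).mp h)
                  · exact Or.inr rfl)
        have hq : ∀ p, p ∈ q' ↔ pvR (pvOccB grid width) height width x p := by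
          intro p
          rw [hqmem p, pvR_colA_iff]
        have hstep : pvBodyA grid width height required_area min_item_area (some (v, u)) x
            = (if (if ((q'.length : Int)) ≥ min_item_area then u + ((q'.length : Int)) else u)
                  ≥ required_area
               then none
               else some (v', if ((q'.length : Int)) ≥ min_item_area
                  then u + ((q'.length : Int)) else u)) := by
          simp only [pvBodyA]
          rw [if_pos ⟨hcolf, hcontf⟩, heq]
        rw [hstep]
        have hlen : q'.length = (pvRegion (pvOccB grid width) height width x).length := by
          obtain ⟨ndr, memr⟩ := pvRegion_spec (pvOccB grid width) height width x hfree
          have : q'.Perm (pvRegion (pvOccB grid width) height width x) := by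
            rw [List.perm_ext_iff_of_nodup qnd' ndr]
            intro p
            rw [hq p, memr p]
          exact this.length_eq
        have hv'mem : ∀ p, p ∈ v' ↔ (p ∈ v ∨ p ∈ q') := by
          intro p
          rw [← PySem.Set.contains_iff, hv' p, PySem.Set.contains_iff]
        have hdisjvq : ∀ p, p ∈ v → p ∉ q' := by
          intro p hpv hpq
          exact hcont (hv2 p x ((PySem.Set.contains_iff _ _).mpr hpv)
            (pvR_symm ((hq p).mp hpq)))
        have hpermv' : v'.Perm (v ++ q') := by
          rw [List.perm_ext_iff_of_nodup vnd' (hnd.append qnd'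
            (List.disjoint_left.mpr (fun a ha => hdisjvq a ha)))]
          intro p
          rw [hv'mem p, List.mem_append]
        have hbig_const : ∀ p ∈ q', pvBig (pvOccB grid width) height width min_item_area p
            = pvBig (pvOccB grid width) height width min_item_area x := by
          intro p hp
          have hR := (hq p).mp hp
          unfold pvBig
          rw [pvRegion_len_congr hfree hR]
        have hcnt : (List.countP (pvBig (pvOccB grid width) height width min_item_area) v' : Int)
            = (if ((q'.length : Int)) ≥ min_item_area then u + ((q'.length : Int)) else u) := by
          rw [hpermv'.countP_eq, List.countP_append, hu]
          by_cases hb : ((q'.length : Int)) ≥ min_item_area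
          · have hbx : pvBig (pvOccB grid width) height width min_item_area x = true := by
              unfold pvBig
              rw [← hlen]
              exact decide_eq_true hb
            have : List.countP (pvBig (pvOccB grid width) height width min_item_area) q'
                = q'.length :=
              List.countP_eq_length.mpr (fun p hp => (hbig_const p hp).trans hbx)
            rw [this, if_pos hb]
            push_cast
            ring
          · have hbx : pvBig (pvOccB grid width) height width min_item_area x = false := by
              unfold pvBig
              rw [← hlen]
              exact decide_eq_false hb
            have : List.countP (pvBig (pvOccB grid width) height width min_item_area) q' = 0 :=
              List.countP_eq_zero.mpr (fun p hp => by rw [hbig_const p hp, hbx]; simp)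
            rw [this, if_neg hb]
            push_cast
            ring
        have hv'free : ∀ p, p ∈ v' → pvFreeC (pvOccB grid width) height width p = true := by
          intro p hp
          rcases (hv'mem p).mp hp with h | h
          · exact hv1 p ((PySem.Set.contains_iff _ _).mpr h)
          · exact pvR_free hfree ((hq p).mp h)
        by_cases hex : (if ((q'.length : Int)) ≥ min_item_area then u + ((q'.length : Int)) else u)
            ≥ required_area
        · rw [if_pos hex, pvA_none]
          have hle : (List.countP (pvBig (pvOccB grid width) height width min_item_area) v' : Int)
              ≤ (List.countP (fun p => pvFreeC (pvOccB grid width) height width p &&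
                  pvBig (pvOccB grid width) height width min_item_area p)
                  (pvCells height width) : Int) := by
            have hsub : v' ⊆ (pvCells height width).filter
                (pvFreeC (pvOccB grid width) height width) := by
              intro p hp
              rw [List.mem_filter, mem_pvCells]
              have hf := hv'free p hp
              refine ⟨?_, hf⟩
              simp only [pvFreeC, Bool.and_eq_true] at hf
              exact hf.1
            have h1 := pvCountP_le (pvBig (pvOccB grid width) height width min_item_area)
              vnd' hsub
            have h2 : List.countP (pvBig (pvOccB grid width) height width min_item_area)
                ((pvCells height width).filter (pvFreeC (pvOccB grid width) height width))
                = List.countP (fun p => pvFreeC (pvOccB grid width) height width p &&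
                  pvBig (pvOccB grid width) height width min_item_area p)
                  (pvCells height width) := by
              rw [List.countP_filter]
              exact List.countP_congr (fun x _ => by simp [Bool.and_comm])
            rw [h2] at h1
            exact_mod_cast h1
          have : ((List.countP (fun p => pvFreeC (pvOccB grid width) height width p &&
              pvBig (pvOccB grid width) height width min_item_area p)
              (pvCells height width) : Int)) ≥ required_area := by
            rw [← hcnt] at hex
            exact le_trans hex hle
          exact (decide_eq_true this).symm
        · rw [if_neg hex]
          refine ih hrest' v' _ vnd' ?_ ?_ hcnt.symm ?_
          · intro p hp
            exact hv'free p ((PySem.Set.contains_iff _ _).mp hp)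
          · intro p p' hp hR
            rw [PySem.Set.contains_iff] at hp ⊢
            rcases (hv'mem p).mp hp with h | h
            · exact (hv'mem p').mpr (Or.inl ((PySem.Set.contains_iff _ _).mp
                (hv2 p p' ((PySem.Set.contains_iff _ _).mpr h) hR)))
            · exact (hv'mem p').mpr (Or.inr ((hq p').mpr (((hq p).mp h).trans hR)))
          · intro p hp
            rcases hcov p hp with h' | h'
            · rcases List.mem_cons.mp h' with rfl | h''
              · exact Or.inr ((PySem.Set.contains_iff _ _).mpr
                  ((hv'mem p).mpr (Or.inr ((hq p).mpr Relation.ReflTransGen.refl))))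
              · exact Or.inl h''
            · exact Or.inr ((PySem.Set.contains_iff _ _).mpr
                ((hv'mem p).mpr (Or.inl ((PySem.Set.contains_iff _ _).mp h'))))
    · have hcolt : PySem.Set.contains (pvCollision grid width height) x = true := by
        refine (pvCollision_mem grid width height x).mpr ⟨hxin, ?_⟩
        simp only [pvFreeC, Bool.and_eq_true, Bool.not_eq_true'] at hfree
        cases hocc : pvOccB grid width x
        · exact absurd ⟨hxin, hocc⟩ hfree
        · rfl
      have hstep : pvBodyA grid width height required_area min_item_area (some (v, u)) x
          = some (v, u) := by
        simp only [pvBodyA]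
        rw [if_neg (by rw [hcolt]; simp)]
      rw [hstep]
      refine ih hrest' v u hnd hv1 hv2 hu ?_
      intro p hp
      rcases hcov p hp with h' | h'
      · rcases List.mem_cons.mp h' with rfl | h''
        · exact absurd hp hfree
        · exact Or.inl h''
      · exact Or.inr h'

lemma pvFlatA (grid : List Int) (width height required_area min_item_area : Int)
    (init : Option (PySem.Set (Int × Int) × Int)) :
    (PySem.List.pyRange 0 height).foldl (fun st r =>
        (PySem.List.pyRange 0 width).foldl (fun st c =>
          pvBodyA grid width height required_area min_item_area st (r, c)) st) init
    = (pvCells height width).foldl (pvBodyA grid width height required_area min_item_area) init := by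
  rw [pvCells, List.foldl_flatMap]
  simp only [List.foldl_map]

-- ===== B-side machinery =====

-- Dict.erase lemmas (not in the PySem book)
lemma pvFindFilter {ν : Type} (k x : Int × Int) :
    ∀ (t : List ((Int × Int) × ν)),
    List.find? (fun p => p.1 == x) (t.filter (fun p => !p.1 == k))
      = if x = k then none else List.find? (fun p => p.1 == x) t := by
  intro t
  induction t with
  | nil => by_cases h : x = k <;> simp [h]
  | cons a t ih =>
    by_cases hak : a.1 = k
    · by_cases hxk : x = k
      · simp [List.filter_cons, hak, hxk, ih, beq_iff_eq]
      · have hax : (a.1 == x) = false := by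
          simp only [beq_eq_false_iff_ne]; intro h; exact hxk (h ▸ hak)
        have hkx : (k == x) = false := beq_eq_false_iff_ne.mpr (fun h => hxk h.symm)
        simp [List.filter_cons, hak, hxk, List.find?_cons, hax, ih, hkx]
    · by_cases hax : a.1 = x
      · have hxk : ¬ x = k := fun h => hak (hax.trans h)
        simp [List.filter_cons, hak, hxk, List.find?_cons, hax, beq_iff_eq]
      · have hax' : (a.1 == x) = false := by simp [beq_eq_false_iff_ne, hax]
        have hak' : (a.1 == k) = false := by simp [beq_eq_false_iff_ne, hak]
        simp [List.filter_cons, hak', List.find?_cons, hax', ih]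

lemma pvDict_get?_erase {ν : Type} (d : PySem.Dict (Int × Int) ν) (k x : Int × Int) :
    (d.erase k).get? x = if x = k then none else d.get? x := by
  simp only [PySem.Dict.erase, PySem.Dict.get?, PySem.Dict.items]
  rw [pvFindFilter]
  by_cases h : x = k <;> simp [h]

lemma pvDict_keys_erase_nodup {ν : Type} (d : PySem.Dict (Int × Int) ν) (k : Int × Int)
    (h : d.keys.Nodup) : (d.erase k).keys.Nodup := by
  have hsub : (d.erase k).keys.Sublist d.keys := by
    simp only [PySem.Dict.erase, PySem.Dict.keys, PySem.Dict.items]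
    exact (List.filter_sublist).map _
  exact hsub.nodup h

-- row-major order on cells
def pvRmLt (a b : Int × Int) : Prop := a.1 < b.1 ∨ (a.1 = b.1 ∧ a.2 < b.2)

lemma pvPyRange_pairwise (a b : Int) : (PySem.List.pyRange a b).Pairwise (· < ·) := by
  by_cases hab : a < b
  · have key : ∀ n (a : Int), (b - a).toNat = n → (PySem.List.pyRange a b).Pairwise (· < ·) := by
      intro n
      induction n with
      | zero =>
        intro a ha
        have : PySem.List.pyRange a b = [] := by
          rw [List.eq_nil_iff_forall_not_mem]
          intro x hx
          have := (PySem.List.mem_pyRange_one).mp hx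
          omega
        rw [this]; exact List.Pairwise.nil
      | succ n ih =>
        intro a ha
        by_cases h : a < b
        · rw [PySem.List.pyRange_one_cons h]
          refine List.Pairwise.cons ?_ (ih (a + 1) (by omega))
          intro x hx
          have := (PySem.List.mem_pyRange_one).mp hx
          omega
        · have : PySem.List.pyRange a b = [] := by
            rw [List.eq_nil_iff_forall_not_mem]
            intro x hx
            have := (PySem.List.mem_pyRange_one).mp hx
            omega
          rw [this]; exact List.Pairwise.nil
    exact key (b - a).toNat a rfl
  · have : PySem.List.pyRange a b = [] := by
      rw [List.eq_nil_iff_forall_not_mem]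
      intro x hx
      have := (PySem.List.mem_pyRange_one).mp hx
      omega
    rw [this]; exact List.Pairwise.nil

lemma pvCells_pairwise (height width : Int) : (pvCells height width).Pairwise pvRmLt := by
  rw [pvCells]
  have hrows := pvPyRange_pairwise 0 height
  generalize hrs : PySem.List.pyRange 0 height = rs at hrows ⊢
  clear hrs
  induction hrows with
  | nil => simp
  | @cons r rs hr _ ih =>
    rw [List.flatMap_cons, List.pairwise_append]
    refine ⟨?_, ih, ?_⟩
    · rw [List.pairwise_map]
      refine (pvPyRange_pairwise 0 width).imp ?_
      intro c1 c2 h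
      exact Or.inr ⟨rfl, h⟩
    · intro x hx y hy
      simp only [List.mem_map] at hx
      obtain ⟨c1, _, rfl⟩ := hx
      simp only [List.mem_flatMap, List.mem_map] at hy
      obtain ⟨r', hr', c2, _, rfl⟩ := hy
      exact Or.inl (hr r' hr')

lemma pvRmLt_asymm {a b : Int × Int} (h : pvRmLt a b) : ¬ pvRmLt b a := by
  rcases h with h | ⟨h1, h2⟩ <;> rintro (h' | ⟨h1', h2'⟩) <;> omega

-- relations for the labeling invariant
def pvAdjL (occ : Int × Int → Bool) (height width : Int) (L : List (Int × Int))
    (a b : Int × Int) : Prop :=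
  a ∈ L ∧ b ∈ L ∧ pvAdj occ height width a b

def pvConnL (occ : Int × Int → Bool) (height width : Int) (L : List (Int × Int)) :
    Int × Int → Int × Int → Prop :=
  Relation.ReflTransGen (pvAdjL occ height width L)

lemma pvRTG_congr {α : Type} {A B : α → α → Prop} (h : ∀ a b, A a b ↔ B a b) (x y : α) :
    Relation.ReflTransGen A x y ↔ Relation.ReflTransGen B x y :=
  ⟨Relation.ReflTransGen.mono (fun a b hab => (h a b).mp hab),
   Relation.ReflTransGen.mono (fun a b hab => (h a b).mpr hab)⟩

lemma pvRTG_eq_self {α : Type} {R : α → α → Prop} {p x : α}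
    (hRp : ∀ z, ¬ R z p) (h : Relation.ReflTransGen R x p) : x = p := by
  induction h with
  | refl => rfl
  | tail _ hstep _ => exact absurd hstep (hRp _)

-- adding one vertex p with neighbour set N to a symmetric graph R
lemma pvConn_snoc {α : Type} (R : α → α → Prop) (N : α → Prop) (p : α)
    (hsym : Symmetric R) (hRp : ∀ z, ¬ R p z) (hRp' : ∀ z, ¬ R z p) :
    ∀ x y, Relation.ReflTransGen (fun a b => R a b ∨ (a = p ∧ N b) ∨ (b = p ∧ N a)) x y ↔
      (Relation.ReflTransGen R x y ∨
        ((x = p ∨ ∃ n, N n ∧ Relation.ReflTransGen R n x) ∧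
         (y = p ∨ ∃ n, N n ∧ Relation.ReflTransGen R n y))) := by
  intro x y
  constructor
  · intro h
    induction h with
    | refl => exact Or.inl Relation.ReflTransGen.refl
    | @tail b c _ hstep ih =>
      rcases hstep with hR | ⟨rfl, hNc⟩ | ⟨rfl, hNb⟩
      · rcases ih with ih | ⟨hx, hb⟩
        · exact Or.inl (ih.tail hR)
        · rcases hb with rfl | ⟨n, hn, hpath⟩
          · exact absurd hR (hRp _)
          · exact Or.inr ⟨hx, Or.inr ⟨n, hn, hpath.tail hR⟩⟩
      · rcases ih with ih | ⟨hx, _⟩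
        · have : x = b := pvRTG_eq_self hRp' ih
          subst this
          exact Or.inr ⟨Or.inl rfl, Or.inr ⟨c, hNc, Relation.ReflTransGen.refl⟩⟩
        · exact Or.inr ⟨hx, Or.inr ⟨c, hNc, Relation.ReflTransGen.refl⟩⟩
      · rcases ih with ih | ⟨hx, _⟩
        · exact Or.inr ⟨Or.inr ⟨b, hNb, Relation.ReflTransGen.symmetric hsym ih⟩, Or.inl rfl⟩
        · exact Or.inr ⟨hx, Or.inl rfl⟩
  · intro h
    have hSsym : Symmetric (fun a b => R a b ∨ (a = p ∧ N b) ∨ (b = p ∧ N a)) := by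
      intro a b hab
      rcases hab with h' | ⟨h1, h2⟩ | ⟨h1, h2⟩
      · exact Or.inl (hsym h')
      · exact Or.inr (Or.inr ⟨h1, h2⟩)
      · exact Or.inr (Or.inl ⟨h1, h2⟩)
    have lift : ∀ u v, Relation.ReflTransGen R u v →
        Relation.ReflTransGen (fun a b => R a b ∨ (a = p ∧ N b) ∨ (b = p ∧ N a)) u v :=
      fun u v huv => huv.mono (fun a b hab => Or.inl hab)
    have toP : ∀ z, (z = p ∨ ∃ n, N n ∧ Relation.ReflTransGen R n z) →
        Relation.ReflTransGen (fun a b => R a b ∨ (a = p ∧ N b) ∨ (b = p ∧ N a)) p z := by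
      rintro z (rfl | ⟨n, hn, hpath⟩)
      · exact Relation.ReflTransGen.refl
      · exact Relation.ReflTransGen.head (Or.inr (Or.inl ⟨rfl, hn⟩)) (lift n z hpath)
    rcases h with h | ⟨hx, hy⟩
    · exact lift x y h
    · exact (Relation.ReflTransGen.symmetric hSsym (toP x hx)).trans (toP y hy)

-- effect of the inner relabel loop
lemma pvRelabelFold (target : Int × Int) (m : List (Int × Int)) :
    ∀ (c0 : PySem.Dict (Int × Int) (Int × Int))
      (m0 : PySem.Dict (Int × Int) (List (Int × Int))) (s0 : List (Int × Int)),
    m0.get? target = some s0 →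
    (∀ x, (m.foldl (pvRelabel target) (c0, m0)).1.get? x
        = if x ∈ m then some target else c0.get? x) ∧
    (∀ l, (m.foldl (pvRelabel target) (c0, m0)).2.get? l
        = if l = target then some (s0 ++ m) else m0.get? l) := by
  induction m with
  | nil =>
    intro c0 m0 s0 hs0
    constructor
    · intro x; simp
    · intro l
      by_cases h : l = target
      · subst h; simp [hs0]
      · simp [h]
  | cons c m ih =>
    intro c0 m0 s0 hs0
    simp only [List.foldl_cons, pvRelabel]
    have hgd : m0.getD target [] = s0 := by
      rw [PySem.Dict.getD_eq_get?_getD, hs0]; rfl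
    obtain ⟨ih1, ih2⟩ := ih (c0.insert c target)
      (m0.insert target (m0.getD target [] ++ [c])) (s0 ++ [c])
      (by rw [PySem.Dict.get?_insert_self, hgd])
    constructor
    · intro x
      rw [ih1 x, PySem.Dict.get?_insert]
      by_cases hx : x ∈ c :: m
      · rcases List.mem_cons.mp hx with rfl | hx'
        · by_cases hxm : x ∈ m <;> simp [hxm]
        · simp [hx, hx']
      · have h1 : x ∉ m := fun h => hx (List.mem_cons_of_mem _ h)
        have h2 : ¬ x = c := fun h => hx (h ▸ List.mem_cons_self)
        simp [hx, h1, h2]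
    · intro l
      rw [ih2 l]
      by_cases h : l = target
      · subst h; simp
      · simp [h, PySem.Dict.get?_insert_of_ne _ _ h]

lemma pvRelabelFold_keys (target : Int × Int) (m : List (Int × Int)) :
    ∀ (c0 : PySem.Dict (Int × Int) (Int × Int))
      (m0 : PySem.Dict (Int × Int) (List (Int × Int))),
    m0.keys.Nodup → (m.foldl (pvRelabel target) (c0, m0)).2.keys.Nodup := by
  induction m with
  | nil => intro c0 m0 h; simpa using h
  | cons c m ih =>
    intro c0 m0 h
    simp only [List.foldl_cons, pvRelabel]
    exact ih _ _ (PySem.Dict.nodup_keys_insert _ _ _ h)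

-- shape of the labels list
lemma pvLabels_eq (comp : PySem.Dict (Int × Int) (Int × Int)) (p : Int × Int) :
    pvLabels comp p =
      match comp.get? (p.1 - 1, p.2), comp.get? (p.1, p.2 - 1) with
      | none, none => []
      | some a, none => [a]
      | none, some b => [b]
      | some a, some b => if b = a then [a] else [a, b] := by
  unfold pvLabels pvNbrsUL
  cases h1 : comp.get? (p.1 - 1, p.2) <;> cases h2 : comp.get? (p.1, p.2 - 1) <;>
    simp [List.foldl, h1, h2, List.contains_eq_mem] <;> split_ifs <;> simp_all

lemma pvIsSome_of_eq_some {α : Type} {o : Option α} {a : α} (h : o = some a) :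
    o.isSome = true := by rw [h]; rfl

lemma pvLabels_mem (comp : PySem.Dict (Int × Int) (Int × Int)) (p t : Int × Int) :
    t ∈ pvLabels comp p ↔ ∃ n ∈ pvNbrsUL p, comp.get? n = some t := by
  rw [pvLabels_eq]
  cases h1 : comp.get? (p.1 - 1, p.2) <;> cases h2 : comp.get? (p.1, p.2 - 1) <;>
    simp [pvNbrsUL, h1, h2] <;> (try split_ifs) <;> simp_all [eq_comm] <;> tauto

lemma pvLabels_shape (comp : PySem.Dict (Int × Int) (Int × Int)) (p : Int × Int) :
    pvLabels comp p = [] ∨ (∃ a, pvLabels comp p = [a]) ∨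
      (∃ a b, a ≠ b ∧ pvLabels comp p = [a, b]) := by
  rw [pvLabels_eq]
  cases h1 : comp.get? (p.1 - 1, p.2) <;> cases h2 : comp.get? (p.1, p.2 - 1)
  · exact Or.inl rfl
  · exact Or.inr (Or.inl ⟨_, rfl⟩)
  · exact Or.inr (Or.inl ⟨_, rfl⟩)
  · rename_i a b
    by_cases hab : b = a
    · exact Or.inr (Or.inl ⟨a, by simp [hab]⟩)
    · exact Or.inr (Or.inr ⟨a, b, fun h => hab h.symm, by simp [hab]⟩)

-- the labeling invariant
def pvInv (occ : Int × Int → Bool) (height width : Int) (L : List (Int × Int))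
    (st : PySem.Dict (Int × Int) (Int × Int) × PySem.Dict (Int × Int) (List (Int × Int))) :
    Prop :=
  (∀ x, (st.1.get? x).isSome ↔ (x ∈ L ∧ pvFreeC occ height width x = true)) ∧
  (∀ l m, st.2.get? l = some m → m.Nodup ∧ (∀ x, x ∈ m ↔ st.1.get? x = some l)) ∧
  (∀ x l, st.1.get? x = some l → (st.2.get? l).isSome) ∧
  (∀ x y lx ly, st.1.get? x = some lx → st.1.get? y = some ly →
      (lx = ly ↔ pvConnL occ height width L x y)) ∧
  st.2.keys.Nodup ∧
  (∀ l m, st.2.get? l = some m → l ∈ m)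

lemma pvInv_init (occ : Int × Int → Bool) (height width : Int) :
    pvInv occ height width [] (PySem.Dict.empty, PySem.Dict.empty) := by
  refine ⟨?_, ?_, ?_, ?_, ?_, ?_⟩ <;>
    simp [PySem.Dict.get?_empty, PySem.Dict.keys_empty]

-- one scan step preserves the invariant
lemma pvStepInvAlt (grid : List Int) (width height : Int) (L rest : List (Int × Int))
    (p : Int × Int) (hsplit : pvCells height width = L ++ p :: rest)
    (st : PySem.Dict (Int × Int) (Int × Int) × PySem.Dict (Int × Int) (List (Int × Int)))
    (hinv : pvInv (pvOccB grid width) height width L st) :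
    pvInv (pvOccB grid width) height width (L ++ [p]) (pvBodyAlt grid width st p) := by
  obtain ⟨hdom, hpart, hlab, hconn, hknd, hself⟩ := hinv
  have hpair := pvCells_pairwise height width
  rw [hsplit] at hpair
  have hpairA := List.pairwise_append.mp hpair
  have hLp : ∀ q ∈ L, pvRmLt q p := fun q hq => hpairA.2.2 q hq p List.mem_cons_self
  have hprest : ∀ q ∈ rest, pvRmLt p q := fun q hq => List.rel_of_pairwise_cons hpairA.2.1 hq
  have hpnotL : p ∉ L := by
    intro h
    rcases hLp p h with h' | ⟨_, h'⟩ <;> omega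
  have hpcells : p ∈ pvCells height width := by
    rw [hsplit]; exact List.mem_append.mpr (Or.inr List.mem_cons_self)
  have hinBp : pvInB height width p = true := mem_pvCells.mp hpcells
  have hmemL : ∀ q, q ∈ L ↔ (q ∈ pvCells height width ∧ pvRmLt q p) := by
    intro q
    constructor
    · intro hq
      exact ⟨by rw [hsplit]; exact List.mem_append.mpr (Or.inl hq), hLp q hq⟩
    · rintro ⟨hq, hlt⟩
      rw [hsplit] at hq
      rcases List.mem_append.mp hq with h | h
      · exact h
      · rcases List.mem_cons.mp h with rfl | h'
        · exfalso; rcases hlt with h' | ⟨_, h'⟩ <;> omega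
        · exact absurd hlt (pvRmLt_asymm (hprest q h'))
  have hULnbrs : ∀ n ∈ pvNbrsUL p, n ∈ pvNbrs p := by
    intro n hn
    have hq : (n.1 = p.1 - 1 ∧ n.2 = p.2) ∨ (n.1 = p.1 ∧ n.2 = p.2 - 1) := by
      simpa [pvNbrsUL, Prod.ext_iff] using hn
    simp only [pvNbrs, List.mem_cons, List.not_mem_nil, or_false, Prod.ext_iff]
    omega
  have hULlt : ∀ n ∈ pvNbrsUL p, pvRmLt n p := by
    intro n hn
    have hq : (n.1 = p.1 - 1 ∧ n.2 = p.2) ∨ (n.1 = p.1 ∧ n.2 = p.2 - 1) := by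
      simpa [pvNbrsUL, Prod.ext_iff] using hn
    unfold pvRmLt
    omega
  have hpadj_self : ¬ pvAdj (pvOccB grid width) height width p p := by
    rintro ⟨_, _, hmem⟩
    have hq : (p.1 = p.1 + 1 ∧ p.2 = p.2) ∨ (p.1 = p.1 - 1 ∧ p.2 = p.2) ∨
        (p.1 = p.1 ∧ p.2 = p.2 + 1) ∨ (p.1 = p.1 ∧ p.2 = p.2 - 1) := by
      simpa [pvNbrs, Prod.ext_iff] using hmem
    omega
  have hNbrUL : ∀ q, pvAdj (pvOccB grid width) height width p q → q ∈ L → q ∈ pvNbrsUL p := by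
    intro q hadj hqL
    have hlt : q.1 < p.1 ∨ (q.1 = p.1 ∧ q.2 < p.2) := hLp q hqL
    have hq : (q.1 = p.1 + 1 ∧ q.2 = p.2) ∨ (q.1 = p.1 - 1 ∧ q.2 = p.2) ∨
        (q.1 = p.1 ∧ q.2 = p.2 + 1) ∨ (q.1 = p.1 ∧ q.2 = p.2 - 1) := by
      simpa [pvNbrs, Prod.ext_iff] using hadj.2.2
    have hgoal : (q.1 = p.1 - 1 ∧ q.2 = p.2) ∨ (q.1 = p.1 ∧ q.2 = p.2 - 1) := by omega
    simpa [pvNbrsUL, Prod.ext_iff] using hgoal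
  have hULfreeL : ∀ n ∈ pvNbrsUL p, pvFreeC (pvOccB grid width) height width n = true → n ∈ L := by
    intro n hn hf
    have hin : pvInB height width n = true := by
      simp only [pvFreeC, Bool.and_eq_true] at hf
      exact hf.1
    exact (hmemL n).mpr ⟨mem_pvCells.mpr hin, hULlt n hn⟩
  -- the neighbour set of p in the extended graph
  have hNdomF : ∀ n, (n ∈ L ∧ pvAdj (pvOccB grid width) height width p n) ↔
      (pvFreeC (pvOccB grid width) height width p = true ∧ n ∈ pvNbrsUL p ∧
        (st.1.get? n).isSome) := by
    intro n
    constructor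
    · rintro ⟨hnL, hadj⟩
      exact ⟨hadj.1, hNbrUL n hadj hnL, (hdom n).mpr ⟨hnL, hadj.2.1⟩⟩
    · rintro ⟨hfp, hnUL, hds⟩
      have h2 := (hdom n).mp hds
      exact ⟨h2.1, hfp, h2.2, hULnbrs n hnUL⟩
  have hAdjL' : ∀ a b, pvAdjL (pvOccB grid width) height width (L ++ [p]) a b ↔
      (pvAdjL (pvOccB grid width) height width L a b ∨
        (a = p ∧ (b ∈ L ∧ pvAdj (pvOccB grid width) height width p b)) ∨
        (b = p ∧ (a ∈ L ∧ pvAdj (pvOccB grid width) height width p a))) := by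
    intro a b
    unfold pvAdjL
    simp only [List.mem_append, List.mem_singleton]
    constructor
    · rintro ⟨ha, hb, hadj⟩
      rcases ha with ha | rfl
      · rcases hb with hb | rfl
        · exact Or.inl ⟨ha, hb, hadj⟩
        · exact Or.inr (Or.inr ⟨rfl, ha, pvAdj_symm _ _ _ hadj⟩)
      · rcases hb with hb | rfl
        · exact Or.inr (Or.inl ⟨rfl, hb, hadj⟩)
        · exact absurd hadj hpadj_self
    · rintro (⟨ha, hb, hadj⟩ | ⟨rfl, hb, hadj⟩ | ⟨rfl, ha, hadj⟩)
      · exact ⟨Or.inl ha, Or.inl hb, hadj⟩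
      · exact ⟨Or.inr rfl, Or.inl hb, hadj⟩
      · exact ⟨Or.inl ha, Or.inr rfl, pvAdj_symm _ _ _ hadj⟩
  have hAdjLp : ∀ z, ¬ pvAdjL (pvOccB grid width) height width L p z := by
    rintro z ⟨h, _, _⟩; exact hpnotL h
  have hAdjLp' : ∀ z, ¬ pvAdjL (pvOccB grid width) height width L z p := by
    rintro z ⟨_, h, _⟩; exact hpnotL h
  have hAdjLsym : Symmetric (pvAdjL (pvOccB grid width) height width L) := by
    rintro a b ⟨ha, hb, hadj⟩
    exact ⟨hb, ha, pvAdj_symm _ _ _ hadj⟩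
  have hconnE : ∀ x y, pvConnL (pvOccB grid width) height width (L ++ [p]) x y ↔
      (pvConnL (pvOccB grid width) height width L x y ∨
        ((x = p ∨ ∃ n, (n ∈ L ∧ pvAdj (pvOccB grid width) height width p n) ∧
            pvConnL (pvOccB grid width) height width L n x) ∧
         (y = p ∨ ∃ n, (n ∈ L ∧ pvAdj (pvOccB grid width) height width p n) ∧
            pvConnL (pvOccB grid width) height width L n y))) := by
    intro x y
    unfold pvConnL
    rw [pvRTG_congr hAdjL' x y]
    exact pvConn_snoc _ _ p hAdjLsym hAdjLp hAdjLp' x y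
  have hconnLp : ∀ y, pvConnL (pvOccB grid width) height width L p y → y = p := by
    intro y h
    exact pvRTG_eq_self hAdjLp' (Relation.ReflTransGen.symmetric hAdjLsym h)
  -- facts about labels
  have hlabL : ∀ x t, st.1.get? x = some t →
      (st.1.get? t = some t ∧ t ∈ L ∧ (st.2.get? t).isSome) := by
    intro x t hx
    have hs := hlab x t hx
    obtain ⟨m, hm⟩ := Option.isSome_iff_exists.mp hs
    have htm : t ∈ m := hself t m hm
    have ht : st.1.get? t = some t := ((hpart t m hm).2 t).mp htm
    exact ⟨ht, ((hdom t).mp (pvIsSome_of_eq_some ht)).1, hs⟩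
  have hoccdef : pvTestBit (PySem.List.pyGetD grid p.1 0) (width - 1 - p.2)
      = pvOccB grid width p := rfl
  by_cases hocc : pvOccB grid width p = true
  · -- occupied cell: state unchanged, p joins no component
    have hbody : pvBodyAlt grid width st p = st := by
      unfold pvBodyAlt
      rw [hoccdef, if_pos hocc]
    rw [hbody]
    have hfreep : pvFreeC (pvOccB grid width) height width p = false := by
      simp [pvFreeC, hocc]
    have hconnEq : ∀ x y, pvConnL (pvOccB grid width) height width (L ++ [p]) x y ↔
        pvConnL (pvOccB grid width) height width L x y := by
      intro x y
      rw [hconnE]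
      have hN : ∀ n, ¬ (n ∈ L ∧ pvAdj (pvOccB grid width) height width p n) := by
        rintro n ⟨_, hadj⟩
        rw [hadj.1] at hfreep
        exact absurd hfreep (by decide)
      constructor
      · rintro (h | ⟨hx, hy⟩)
        · exact h
        · rcases hx with rfl | ⟨n, hn, _⟩
          · rcases hy with rfl | ⟨n, hn, _⟩
            · exact Relation.ReflTransGen.refl
            · exact absurd hn (hN n)
          · exact absurd hn (hN n)
      · exact fun h => Or.inl h
    refine ⟨?_, hpart, hlab, ?_, hknd, hself⟩
    · intro x
      rw [hdom x]
      constructor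
      · rintro ⟨h1, h2⟩; exact ⟨List.mem_append.mpr (Or.inl h1), h2⟩
      · rintro ⟨h1, h2⟩
        rcases List.mem_append.mp h1 with h | h
        · exact ⟨h, h2⟩
        · rw [List.mem_singleton.mp h] at h2
          rw [h2] at hfreep
          exact absurd hfreep (by decide)
    · intro x y lx ly hx hy
      rw [hconn x y lx ly hx hy, hconnEq]
  · -- free cell
    have hfreep : pvFreeC (pvOccB grid width) height width p = true := by
      simp [pvFreeC, hinBp, hocc]
    have hdomp : st.1.get? p = none := by
      cases h : st.1.get? p
      · rfl
      · exact absurd ((hdom p).mp (pvIsSome_of_eq_some h)).1 hpnotL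
    -- reach characterization
    have hreach : ∀ z lz, st.1.get? z = some lz →
        ((z = p ∨ ∃ n, (n ∈ L ∧ pvAdj (pvOccB grid width) height width p n) ∧
            pvConnL (pvOccB grid width) height width L n z) ↔ lz ∈ pvLabels st.1 p) := by
      intro z lz hz
      have hzL : z ∈ L := ((hdom z).mp (pvIsSome_of_eq_some hz)).1
      have hzp : z ≠ p := fun h => hpnotL (h ▸ hzL)
      rw [pvLabels_mem]
      constructor
      · rintro (rfl | ⟨n, hn, hcz⟩)
        · exact absurd rfl hzp
        · obtain ⟨hfp', hnUL, hds⟩ := (hNdomF n).mp hn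
          obtain ⟨ln, hln⟩ := Option.isSome_iff_exists.mp hds
          have : ln = lz := (hconn n z ln lz hln hz).mpr hcz
          exact ⟨n, hnUL, this ▸ hln⟩
      · rintro ⟨n, hnUL, hn⟩
        refine Or.inr ⟨n, (hNdomF n).mpr ⟨hfreep, hnUL, pvIsSome_of_eq_some hn⟩, ?_⟩
        exact (hconn n z lz lz hn hz).mp rfl
    have hlabself : ∀ t ∈ pvLabels st.1 p,
        st.1.get? t = some t ∧ t ∈ L ∧ (st.2.get? t).isSome := by
      intro t ht
      obtain ⟨n, _, hn⟩ := (pvLabels_mem st.1 p t).mp ht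
      exact hlabL n t hn
    rcases pvLabels_shape st.1 p with hsh | ⟨a, hsh⟩ | ⟨a, b, hab, hsh⟩
    · -- no labeled neighbour: p becomes a fresh singleton component
      have hbody : pvBodyAlt grid width st p = (st.1.insert p p, st.2.insert p [p]) := by
        unfold pvBodyAlt
        rw [hoccdef, if_neg hocc, hsh]
        simp [PySem.Dict.insert_insert_self, PySem.Dict.getD_insert_self]
      rw [hbody]
      have hN : ∀ n, ¬ (n ∈ L ∧ pvAdj (pvOccB grid width) height width p n) := by
        rintro n ⟨hnL, hadj⟩
        have hds : (st.1.get? n).isSome := (hdom n).mpr ⟨hnL, hadj.2.1⟩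
        obtain ⟨t, ht⟩ := Option.isSome_iff_exists.mp hds
        have hUL := hNbrUL n hadj hnL
        have : t ∈ pvLabels st.1 p := (pvLabels_mem st.1 p t).mpr ⟨n, hUL, ht⟩
        rw [hsh] at this
        exact absurd this (List.not_mem_nil)
      have hnotp : ∀ x lx, st.1.get? x = some lx → lx ≠ p := by
        intro x lx hx h
        exact hpnotL (h ▸ (hlabL x lx hx).2.1)
      refine ⟨?_, ?_, ?_, ?_, PySem.Dict.nodup_keys_insert _ _ _ hknd, ?_⟩
      · intro x
        rw [PySem.Dict.get?_insert]
        by_cases hx : x = p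
        · obtain rfl := hx.symm
          simp [hfreep]
        · rw [if_neg hx, hdom x]
          constructor
          · rintro ⟨h1, h2⟩; exact ⟨List.mem_append.mpr (Or.inl h1), h2⟩
          · rintro ⟨h1, h2⟩
            rcases List.mem_append.mp h1 with h | h
            · exact ⟨h, h2⟩
            · exact absurd (List.mem_singleton.mp h) hx
      · intro l m hm
        rw [PySem.Dict.get?_insert] at hm
        by_cases hl : l = p
        · obtain rfl := hl.symm
          rw [if_pos rfl] at hm
          obtain rfl : [p] = m := by simpa using hm
          refine ⟨List.nodup_singleton p, ?_⟩
          intro x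
          rw [PySem.Dict.get?_insert]
          by_cases hx : x = p
          · obtain rfl := hx.symm; simp
          · rw [if_neg hx]
            constructor
            · intro hcon
              exact absurd (List.mem_singleton.mp hcon) hx
            · intro hcon
              exact absurd rfl (hnotp x p hcon)
        · rw [if_neg hl] at hm
          obtain ⟨hnd, hmem⟩ := hpart l m hm
          refine ⟨hnd, ?_⟩
          intro x
          rw [PySem.Dict.get?_insert]
          by_cases hx : x = p
          · obtain rfl := hx.symm
            rw [if_pos rfl]
            constructor
            · intro hx'
              have := (hmem p).mp hx'
              rw [hdomp] at this
              exact absurd this (by simp)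
            · intro h
              have h' : p = l := by simpa using h
              exact absurd h'.symm hl
          · rw [if_neg hx]; exact hmem x
      · intro x l hx
        rw [PySem.Dict.get?_insert] at hx ⊢
        by_cases hxp : x = p
        · rw [if_pos hxp] at hx
          obtain rfl : p = l := by simpa using hx
          simp
        · rw [if_neg hxp] at hx
          rw [if_neg (hnotp x l hx)]
          exact hlab x l hx
      · intro x y lx ly hx hy
        rw [PySem.Dict.get?_insert] at hx hy
        rw [hconnE]
        by_cases hxp : x = p
        · obtain rfl := hxp.symm
          rw [if_pos rfl] at hx
          obtain rfl : p = lx := by simpa using hx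
          by_cases hyp : y = p
          · obtain rfl := hyp.symm
            rw [if_pos rfl] at hy
            obtain rfl : p = ly := by simpa using hy
            exact iff_of_true rfl (Or.inr ⟨Or.inl rfl, Or.inl rfl⟩)
          · rw [if_neg hyp] at hy
            constructor
            · intro h
              exact absurd h.symm (hnotp y ly hy)
            · rintro (h | ⟨_, hy'⟩)
              · exact absurd (hconnLp y h) hyp
              · rcases hy' with rfl | ⟨n, hn, _⟩
                · exact absurd rfl hyp
                · exact absurd hn (hN n)
        · rw [if_neg hxp] at hx
          by_cases hyp : y = p
          · obtain rfl := hyp.symm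
            rw [if_pos rfl] at hy
            obtain rfl : p = ly := by simpa using hy
            constructor
            · intro h
              exact absurd h (hnotp x lx hx)
            · rintro (h | ⟨hx', _⟩)
              · exact absurd (hconnLp x (Relation.ReflTransGen.symmetric hAdjLsym h)) hxp
              · rcases hx' with rfl | ⟨n, hn, _⟩
                · exact absurd rfl hxp
                · exact absurd hn (hN n)
          · rw [if_neg hyp] at hy
            rw [hconn x y lx ly hx hy]
            constructor
            · exact fun h => Or.inl h
            · rintro (h | ⟨hx', _⟩)
              · exact h
              · rcases hx' with rfl | ⟨n, hn, _⟩
                · exact absurd rfl hxp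
                · exact absurd hn (hN n)
      · intro l m hm
        rw [PySem.Dict.get?_insert] at hm
        by_cases hl : l = p
        · obtain rfl := hl.symm
          rw [if_pos rfl] at hm
          obtain rfl : [p] = m := by simpa using hm
          simp
        · rw [if_neg hl] at hm
          exact hself l m hm
    · -- exactly one neighbour label a: p joins that component
      obtain ⟨ha1, haL, hads⟩ := hlabself a (by rw [hsh]; exact List.mem_singleton.mpr rfl)
      obtain ⟨ma, hma⟩ := Option.isSome_iff_exists.mp hads
      obtain ⟨hmand, hmamem⟩ := hpart a ma hma
      have hgda : st.2.getD a [] = ma := by rw [PySem.Dict.getD_eq_get?_getD, hma]; rfl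
      have hbody : pvBodyAlt grid width st p
          = (st.1.insert p a, st.2.insert a (ma ++ [p])) := by
        unfold pvBodyAlt
        rw [hoccdef, if_neg hocc, hsh]
        simp [hgda]
      rw [hbody]
      have hreacha : ∀ z lz, st.1.get? z = some lz →
          ((z = p ∨ ∃ n, (n ∈ L ∧ pvAdj (pvOccB grid width) height width p n) ∧
              pvConnL (pvOccB grid width) height width L n z) ↔ lz = a) := by
        intro z lz hz
        rw [hreach z lz hz, hsh, List.mem_singleton]
      have hmaL : ∀ x ∈ ma, x ∈ L ∧ x ≠ p := by
        intro x hx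
        have := (hmamem x).mp hx
        have hxL := ((hdom x).mp (pvIsSome_of_eq_some this)).1
        exact ⟨hxL, fun h => hpnotL (h ▸ hxL)⟩
      have hpma : p ∉ ma := fun h => (hmaL p h).2 rfl
      have hnota : ∀ x lx, st.1.get? x = some lx → lx ≠ p := by
        intro x lx hx h
        exact hpnotL (h ▸ (hlabL x lx hx).2.1)
      refine ⟨?_, ?_, ?_, ?_, PySem.Dict.nodup_keys_insert _ _ _ hknd, ?_⟩
      · intro x
        rw [PySem.Dict.get?_insert]
        by_cases hx : x = p
        · obtain rfl := hx.symm; simp [hfreep]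
        · rw [if_neg hx, hdom x]
          constructor
          · rintro ⟨h1, h2⟩; exact ⟨List.mem_append.mpr (Or.inl h1), h2⟩
          · rintro ⟨h1, h2⟩
            rcases List.mem_append.mp h1 with h | h
            · exact ⟨h, h2⟩
            · exact absurd (List.mem_singleton.mp h) hx
      · intro l m hm
        rw [PySem.Dict.get?_insert] at hm
        by_cases hl : l = a
        · obtain rfl := hl.symm
          rw [if_pos rfl] at hm
          obtain rfl : ma ++ [p] = m := by simpa using hm
          refine ⟨?_, ?_⟩
          · exact hmand.append (List.nodup_singleton p)
              (List.disjoint_left.mpr (fun x hx hx' => (hmaL x hx).2 (List.mem_singleton.mp hx')))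
          · intro x
            rw [PySem.Dict.get?_insert]
            by_cases hx : x = p
            · obtain rfl := hx.symm
              simp [hpma]
            · rw [if_neg hx]
              rw [List.mem_append, List.mem_singleton]
              simp only [hx, or_false]
              exact hmamem x
        · rw [if_neg hl] at hm
          obtain ⟨hnd, hmem⟩ := hpart l m hm
          refine ⟨hnd, ?_⟩
          intro x
          rw [PySem.Dict.get?_insert]
          by_cases hx : x = p
          · obtain rfl := hx.symm
            rw [if_pos rfl]
            constructor
            · intro hx'
              have := (hmem p).mp hx'
              rw [hdomp] at this
              exact absurd this (by simp)
            · intro h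
              have h' : a = l := by simpa using h
              exact absurd h'.symm hl
          · rw [if_neg hx]; exact hmem x
      · intro x l hx
        rw [PySem.Dict.get?_insert] at hx
        rw [PySem.Dict.get?_insert]
        by_cases hxp : x = p
        · rw [if_pos hxp] at hx
          obtain rfl : a = l := by simpa using hx
          simp
        · rw [if_neg hxp] at hx
          by_cases hla : l = a
          · rw [if_pos hla]; simp
          · rw [if_neg hla]
            exact hlab x l hx
      · intro x y lx ly hx hy
        rw [PySem.Dict.get?_insert] at hx hy
        rw [hconnE]
        by_cases hxp : x = p
        · obtain rfl := hxp.symm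
          rw [if_pos rfl] at hx
          obtain rfl : a = lx := by simpa using hx
          by_cases hyp : y = p
          · obtain rfl := hyp.symm
            rw [if_pos rfl] at hy
            obtain rfl : a = ly := by simpa using hy
            exact iff_of_true rfl (Or.inr ⟨Or.inl rfl, Or.inl rfl⟩)
          · rw [if_neg hyp] at hy
            constructor
            · intro h
              exact Or.inr ⟨Or.inl rfl, (hreacha y ly hy).mpr h.symm⟩
            · rintro (h | ⟨_, hy'⟩)
              · exact absurd (hconnLp y h) hyp
              · exact ((hreacha y ly hy).mp hy').symm
        · rw [if_neg hxp] at hx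
          by_cases hyp : y = p
          · obtain rfl := hyp.symm
            rw [if_pos rfl] at hy
            obtain rfl : a = ly := by simpa using hy
            constructor
            · intro h
              exact Or.inr ⟨(hreacha x lx hx).mpr h, Or.inl rfl⟩
            · rintro (h | ⟨hx', _⟩)
              · exact absurd (hconnLp x (Relation.ReflTransGen.symmetric hAdjLsym h)) hxp
              · exact (hreacha x lx hx).mp hx'
          · rw [if_neg hyp] at hy
            rw [hconn x y lx ly hx hy]
            constructor
            · exact fun h => Or.inl h
            · rintro (h | ⟨hx', hy'⟩)
              · exact h
              · have h1 := (hreacha x lx hx).mp hx'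
                have h2 := (hreacha y ly hy).mp hy'
                rw [← hconn x y lx ly hx hy, h1, h2]
      · intro l m hm
        rw [PySem.Dict.get?_insert] at hm
        by_cases hl : l = a
        · obtain rfl := hl.symm
          rw [if_pos rfl] at hm
          obtain rfl : ma ++ [p] = m := by simpa using hm
          exact List.mem_append.mpr (Or.inl (hself a ma hma))
        · rw [if_neg hl] at hm
          exact hself l m hm
    · -- two distinct neighbour labels a, b: merge b's component into a's, then add p
      obtain ⟨ha1, haL, hads⟩ := hlabself a (by rw [hsh]; exact List.mem_cons_self)
      obtain ⟨hb1, hbL, hbds⟩ := hlabself b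
        (by rw [hsh]; exact List.mem_cons_of_mem _ List.mem_cons_self)
      obtain ⟨ma, hma⟩ := Option.isSome_iff_exists.mp hads
      obtain ⟨mb, hmb⟩ := Option.isSome_iff_exists.mp hbds
      obtain ⟨hmand, hmamem⟩ := hpart a ma hma
      obtain ⟨hmbnd, hmbmem⟩ := hpart b mb hmb
      have hdisjab : ∀ x, x ∈ ma → x ∈ mb → False := by
        intro x h1 h2
        have e1 := (hmamem x).mp h1
        have e2 := (hmbmem x).mp h2
        rw [e1] at e2
        exact hab (by simpa using e2)
      have herase_a : (st.2.erase b).get? a = some ma := by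
        rw [pvDict_get?_erase, if_neg hab, hma]
      obtain ⟨hfc, hfm⟩ := pvRelabelFold a mb st.1 (st.2.erase b) ma herase_a
      have hmergest : pvMerge a st b
          = (mb.foldl (pvRelabel a) (st.1, st.2.erase b)) := by
        unfold pvMerge
        rw [hmb]
        rfl
      have hst2c : ∀ x, (pvMerge a st b).1.get? x
          = if x ∈ mb then some a else st.1.get? x := by
        intro x; rw [hmergest]; exact hfc x
      have hst2m : ∀ l, (pvMerge a st b).2.get? l
          = if l = a then some (ma ++ mb) else if l = b then none else st.2.get? l := by
        intro l
        rw [hmergest, hfm l]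
        by_cases hla : l = a
        · simp [hla]
        · rw [if_neg hla, if_neg hla]
          exact pvDict_get?_erase st.2 b l
      have hgd2a : (pvMerge a st b).2.getD a [] = ma ++ mb := by
        rw [PySem.Dict.getD_eq_get?_getD, hst2m a, if_pos rfl]
        rfl
      have hbody : pvBodyAlt grid width st p
          = ((pvMerge a st b).1.insert p a,
             (pvMerge a st b).2.insert a ((ma ++ mb) ++ [p])) := by
        unfold pvBodyAlt
        rw [hoccdef, if_neg hocc, hsh]
        simp [hgd2a]
      rw [hbody]
      have hreachab : ∀ z lz, st.1.get? z = some lz →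
          ((z = p ∨ ∃ n, (n ∈ L ∧ pvAdj (pvOccB grid width) height width p n) ∧
              pvConnL (pvOccB grid width) height width L n z) ↔ (lz = a ∨ lz = b)) := by
        intro z lz hz
        rw [hreach z lz hz, hsh]
        simp
      have hmaL : ∀ x ∈ ma, x ∈ L ∧ x ≠ p := by
        intro x hx
        have := (hmamem x).mp hx
        have hxL := ((hdom x).mp (pvIsSome_of_eq_some this)).1
        exact ⟨hxL, fun h => hpnotL (h ▸ hxL)⟩
      have hmbL : ∀ x ∈ mb, x ∈ L ∧ x ≠ p := by
        intro x hx
        have := (hmbmem x).mp hx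
        have hxL := ((hdom x).mp (pvIsSome_of_eq_some this)).1
        exact ⟨hxL, fun h => hpnotL (h ▸ hxL)⟩
      have hpma : p ∉ ma := fun h => (hmaL p h).2 rfl
      have hpmb : p ∉ mb := fun h => (hmbL p h).2 rfl
      -- labels of the new comp
      have hcomp' : ∀ x, ((pvMerge a st b).1.insert p a).get? x
          = if x = p then some a
            else if x ∈ mb then some a else st.1.get? x := by
        intro x
        rw [PySem.Dict.get?_insert, hst2c x]
      have hmem' : ∀ l, ((pvMerge a st b).2.insert a ((ma ++ mb) ++ [p])).get? l
          = if l = a then some ((ma ++ mb) ++ [p])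
            else if l = b then none else st.2.get? l := by
        intro l
        rw [PySem.Dict.get?_insert, hst2m l]
        by_cases hla : l = a <;> simp [hla]
      have hxmb : ∀ x, x ∈ mb ↔ st.1.get? x = some b := fun x => hmbmem x
      have hnotab : ∀ x lx, st.1.get? x = some lx → lx ≠ p := by
        intro x lx hx h
        exact hpnotL (h ▸ (hlabL x lx hx).2.1)
      -- new label as a function of the old one
      have hcomp'' : ∀ x lx, st.1.get? x = some lx → x ≠ p →
          ((pvMerge a st b).1.insert p a).get? x = some (if lx = b then a else lx) := by
        intro x lx hx hxp
        rw [hcomp' x, if_neg hxp]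
        by_cases hxb : x ∈ mb
        · have := (hxmb x).mp hxb
          rw [hx] at this
          obtain rfl : lx = b := by simpa using this
          simp [hxb]
        · have hlxb : lx ≠ b := fun h => hxb ((hxmb x).mpr (h ▸ hx))
          simp [hxb, hlxb, hx]
      refine ⟨?_, ?_, ?_, ?_, ?_, ?_⟩
      · intro x
        rw [hcomp' x]
        by_cases hx : x = p
        · obtain rfl := hx.symm; simp [hfreep]
        · rw [if_neg hx]
          by_cases hxb : x ∈ mb
          · have hxL := (hmbL x hxb).1
            have hfx : pvFreeC (pvOccB grid width) height width x = true := by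
              have := (hdom x).mp (pvIsSome_of_eq_some ((hxmb x).mp hxb))
              exact this.2
            simp [hxb, hxL, hfx, List.mem_append]
          · rw [if_neg hxb, hdom x]
            constructor
            · rintro ⟨h1, h2⟩; exact ⟨List.mem_append.mpr (Or.inl h1), h2⟩
            · rintro ⟨h1, h2⟩
              rcases List.mem_append.mp h1 with h | h
              · exact ⟨h, h2⟩
              · exact absurd (List.mem_singleton.mp h) hx
      · intro l m hm
        rw [hmem' l] at hm
        by_cases hla : l = a
        · obtain rfl := hla.symm
          rw [if_pos rfl] at hm
          obtain rfl : (ma ++ mb) ++ [p] = m := by simpa using hm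
          refine ⟨?_, ?_⟩
          · refine (hmand.append hmbnd (List.disjoint_left.mpr hdisjab)).append
              (List.nodup_singleton p) (List.disjoint_left.mpr ?_)
            intro x hx hx'
            rcases List.mem_append.mp hx with h | h
            · exact (hmaL x h).2 (List.mem_singleton.mp hx')
            · exact (hmbL x h).2 (List.mem_singleton.mp hx')
          · intro x
            rw [hcomp' x]
            by_cases hx : x = p
            · obtain rfl := hx.symm
              simp [hpma, hpmb, List.mem_append]
            · rw [if_neg hx]
              by_cases hxb : x ∈ mb
              · simp [hxb, List.mem_append]
              · rw [if_neg hxb]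
                constructor
                · intro hin
                  rcases List.mem_append.mp hin with h | h
                  · rcases List.mem_append.mp h with h' | h'
                    · exact (hmamem x).mp h'
                    · exact absurd h' hxb
                  · exact absurd (List.mem_singleton.mp h) hx
                · intro h
                  exact List.mem_append.mpr
                    (Or.inl (List.mem_append.mpr (Or.inl ((hmamem x).mpr h))))
        · rw [if_neg hla] at hm
          by_cases hlb : l = b
          · rw [if_pos hlb] at hm
            exact absurd hm (by simp)
          · rw [if_neg hlb] at hm
            obtain ⟨hnd, hmem⟩ := hpart l m hm
            refine ⟨hnd, ?_⟩
            intro x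
            rw [hcomp' x]
            by_cases hx : x = p
            · obtain rfl := hx.symm
              rw [if_pos rfl]
              constructor
              · intro hx'
                have := (hmem p).mp hx'
                rw [hdomp] at this
                exact absurd this (by simp)
              · intro h
                have h' : a = l := by simpa using h
                exact absurd h'.symm hla
            · rw [if_neg hx]
              by_cases hxb : x ∈ mb
              · rw [if_pos hxb]
                constructor
                · intro hx'
                  have h1 := (hmem x).mp hx'
                  have h2 := (hxmb x).mp hxb
                  rw [h2] at h1
                  have h' : b = l := by simpa using h1
                  exact absurd h'.symm hlb
                · intro h
                  have h' : a = l := by simpa using h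
                  exact absurd h'.symm hla
              · rw [if_neg hxb]
                exact hmem x
      · intro x l hx
        rw [hcomp' x] at hx
        rw [hmem' l]
        by_cases hxp : x = p
        · rw [if_pos hxp] at hx
          obtain rfl : a = l := by simpa using hx
          simp
        · rw [if_neg hxp] at hx
          by_cases hxb : x ∈ mb
          · rw [if_pos hxb] at hx
            obtain rfl : a = l := by simpa using hx
            simp
          · rw [if_neg hxb] at hx
            by_cases hla : l = a
            · rw [if_pos hla]; simp
            · rw [if_neg hla]
              have hlb : l ≠ b := by
                intro h
                exact hxb ((hxmb x).mpr (h ▸ hx))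
              rw [if_neg hlb]
              exact hlab x l hx
      · intro x y lx ly hx hy
        rw [hconnE]
        by_cases hxp : x = p
        · obtain rfl := hxp.symm
          rw [hcomp' p, if_pos rfl] at hx
          obtain rfl : a = lx := by simpa using hx
          by_cases hyp : y = p
          · obtain rfl := hyp.symm
            rw [hcomp' p, if_pos rfl] at hy
            obtain rfl : a = ly := by simpa using hy
            exact iff_of_true rfl (Or.inr ⟨Or.inl rfl, Or.inl rfl⟩)
          · obtain ⟨ly0, hy0⟩ : ∃ ly0, st.1.get? y = some ly0 := by
              rw [hcomp' y, if_neg hyp] at hy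
              by_cases hyb : y ∈ mb
              · exact ⟨b, (hxmb y).mp hyb⟩
              · rw [if_neg hyb] at hy
                exact ⟨ly, hy⟩
            have hly : ly = if ly0 = b then a else ly0 := by
              have := hcomp'' y ly0 hy0 hyp
              rw [hy] at this
              simpa using this
            constructor
            · intro h
              refine Or.inr ⟨Or.inl rfl, (hreachab y ly0 hy0).mpr ?_⟩
              by_cases hb' : ly0 = b
              · exact Or.inr hb'
              · rw [hly, if_neg hb'] at h
                exact Or.inl h.symm
            · rintro (h | ⟨_, hy'⟩)
              · exact absurd (hconnLp y h) hyp
              · rcases (hreachab y ly0 hy0).mp hy' with h' | h'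
                · have hnb : ¬ (ly0 = b) := by rw [h']; exact hab
                  rw [hly, if_neg hnb, h']
                · rw [hly, if_pos h']
        · obtain ⟨lx0, hx0⟩ : ∃ lx0, st.1.get? x = some lx0 := by
            rw [hcomp' x, if_neg hxp] at hx
            by_cases hxb : x ∈ mb
            · exact ⟨b, (hxmb x).mp hxb⟩
            · rw [if_neg hxb] at hx
              exact ⟨lx, hx⟩
          have hlx : lx = if lx0 = b then a else lx0 := by
            have := hcomp'' x lx0 hx0 hxp
            rw [hx] at this
            simpa using this
          by_cases hyp : y = p
          · obtain rfl := hyp.symm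
            rw [hcomp' p, if_pos rfl] at hy
            obtain rfl : a = ly := by simpa using hy
            constructor
            · intro h
              refine Or.inr ⟨(hreachab x lx0 hx0).mpr ?_, Or.inl rfl⟩
              by_cases hb' : lx0 = b
              · exact Or.inr hb'
              · rw [hlx, if_neg hb'] at h
                exact Or.inl h
            · rintro (h | ⟨hx', _⟩)
              · exact absurd (hconnLp _ (Relation.ReflTransGen.symmetric hAdjLsym h)) hxp
              · rcases (hreachab x lx0 hx0).mp hx' with h' | h'
                · have hnb : ¬ (lx0 = b) := by rw [h']; exact hab
                  rw [hlx, if_neg hnb, h']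
                · rw [hlx, if_pos h']
          · obtain ⟨ly0, hy0⟩ : ∃ ly0, st.1.get? y = some ly0 := by
              rw [hcomp' y, if_neg hyp] at hy
              by_cases hyb : y ∈ mb
              · exact ⟨b, (hxmb y).mp hyb⟩
              · rw [if_neg hyb] at hy
                exact ⟨ly, hy⟩
            have hly : ly = if ly0 = b then a else ly0 := by
              have := hcomp'' y ly0 hy0 hyp
              rw [hy] at this
              simpa using this
            have hcxy := hconn x y lx0 ly0 hx0 hy0
            have hrx := hreachab x lx0 hx0
            have hry := hreachab y ly0 hy0
            constructor
            · intro h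
              by_cases hxa : lx0 = a ∨ lx0 = b
              · by_cases hya : ly0 = a ∨ ly0 = b
                · exact Or.inr ⟨hrx.mpr hxa, hry.mpr hya⟩
                · exfalso
                  push_neg at hya
                  rw [hlx, hly, if_neg hya.2] at h
                  rcases hxa with h' | h'
                  · rw [if_neg (by rw [h']; exact hab), h'] at h
                    exact hya.1 h.symm
                  · rw [if_pos h'] at h
                    exact hya.1 h.symm
              · push_neg at hxa
                by_cases hya : ly0 = a ∨ ly0 = b
                · exfalso
                  rw [hlx, hly, if_neg hxa.2] at h
                  rcases hya with h' | h'
                  · rw [if_neg (by rw [h']; exact hab), h'] at h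
                    exact hxa.1 h
                  · rw [if_pos h'] at h
                    exact hxa.1 h
                · push_neg at hya
                  rw [hlx, hly, if_neg hxa.2, if_neg hya.2] at h
                  exact Or.inl (hcxy.mp h)
            · rintro (h | ⟨hx', hy'⟩)
              · have h0 := hcxy.mpr h
                rw [hlx, hly, h0]
              · have h1 := hrx.mp hx'
                have h2 := hry.mp hy'
                rw [hlx, hly]
                rcases h1 with h1 | h1 <;> rcases h2 with h2 | h2
                · rw [if_neg (by rw [h1]; exact hab), if_neg (by rw [h2]; exact hab), h1, h2]
                · rw [if_neg (by rw [h1]; exact hab), if_pos h2, h1]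
                · rw [if_pos h1, if_neg (by rw [h2]; exact hab), h2]
                · rw [if_pos h1, if_pos h2]
      · refine PySem.Dict.nodup_keys_insert _ _ _ ?_
        rw [hmergest]
        exact pvRelabelFold_keys a mb st.1 (st.2.erase b)
          (pvDict_keys_erase_nodup st.2 b hknd)
      · intro l m hm
        rw [hmem' l] at hm
        by_cases hla : l = a
        · obtain rfl := hla.symm
          rw [if_pos rfl] at hm
          obtain rfl : (ma ++ mb) ++ [p] = m := by simpa using hm
          exact List.mem_append.mpr (Or.inl (List.mem_append.mpr (Or.inl (hself a ma hma))))
        · rw [if_neg hla] at hm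
          by_cases hlb : l = b
          · rw [if_pos hlb] at hm
            exact absurd hm (by simp)
          · rw [if_neg hlb] at hm
            exact hself l m hm

lemma pvFoldInvAlt (grid : List Int) (width height : Int) :
    ∀ (suf L : List (Int × Int))
      (st : PySem.Dict (Int × Int) (Int × Int) × PySem.Dict (Int × Int) (List (Int × Int))),
    pvCells height width = L ++ suf →
    pvInv (pvOccB grid width) height width L st →
    pvInv (pvOccB grid width) height width (L ++ suf)
      (suf.foldl (pvBodyAlt grid width) st) := by
  intro suf
  induction suf with
  | nil =>
    intro L st _ hinv
    simpa using hinv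
  | cons p suf ih =>
    intro L st hsplit hinv
    have hstep := pvStepInvAlt grid width height L suf p hsplit st hinv
    have hres := ih (L ++ [p]) _ (by rw [hsplit]; simp) hstep
    simpa using hres

lemma pvFlatAlt (grid : List Int) (width height : Int)
    (init : PySem.Dict (Int × Int) (Int × Int) × PySem.Dict (Int × Int) (List (Int × Int))) :
    (PySem.List.pyRange 0 height).foldl (fun st r =>
        (PySem.List.pyRange 0 width).foldl (fun st c => pvBodyAlt grid width st (r, c)) st) init
    = (pvCells height width).foldl (pvBodyAlt grid width) init := by
  rw [pvCells, List.foldl_flatMap]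
  simp only [List.foldl_map]

lemma pvSumFold (min_item_area : Int) :
    ∀ (ms : List (List (Int × Int))) (init : Int),
    ms.foldl (fun s cells =>
        if (cells.length : Int) ≥ min_item_area then s + (cells.length : Int) else s) init
    = init + (ms.map (fun m =>
        if (m.length : Int) ≥ min_item_area then (m.length : Int) else 0)).sum := by
  intro ms
  induction ms with
  | nil => intro init; simp
  | cons m ms ih =>
    intro init
    simp only [List.foldl_cons, List.map_cons, List.sum_cons]
    rw [ih]
    by_cases h : (m.length : Int) ≥ min_item_area
    · rw [if_pos h, if_pos h]; ring
    · rw [if_neg h, if_neg h]; ring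

lemma pvConnL_cells (occ : Int × Int → Bool) (height width : Int) (x y : Int × Int) :
    pvConnL occ height width (pvCells height width) x y ↔ pvR occ height width x y := by
  constructor
  · exact Relation.ReflTransGen.mono (fun a b hab => hab.2.2)
  · refine Relation.ReflTransGen.mono (fun a b hab => ?_)
    have ha : pvInB height width a = true := by
      have := hab.1
      simp only [pvFreeC, Bool.and_eq_true] at this
      exact this.1
    have hb : pvInB height width b = true := by
      have := hab.2.1
      simp only [pvFreeC, Bool.and_eq_true] at this
      exact this.1
    exact ⟨mem_pvCells.mpr ha, mem_pvCells.mpr hb, hab⟩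

-- the values of the final members dict hold exactly the free cells, partitioned by component
lemma pvB_count (grid : List Int) (width height min_item_area : Int)
    (st : PySem.Dict (Int × Int) (Int × Int) × PySem.Dict (Int × Int) (List (Int × Int)))
    (hinv : pvInv (pvOccB grid width) height width (pvCells height width) st) :
    st.2.values.foldl (fun s cells =>
        if (cells.length : Int) ≥ min_item_area then s + (cells.length : Int) else s) 0
    = ((List.countP (fun q => pvFreeC (pvOccB grid width) height width q &&
        pvBig (pvOccB grid width) height width min_item_area q)
        (pvCells height width) : Nat) : Int) := by
  obtain ⟨hdom, hpart, hlab, hconn, hknd, hself⟩ := hinv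
  -- each member list is exactly one connected free component
  have hitem : ∀ l m, st.2.get? l = some m →
      (m.Nodup ∧
       (∀ x ∈ m, pvFreeC (pvOccB grid width) height width x = true ∧
          pvBig (pvOccB grid width) height width min_item_area x
            = decide ((m.length : Int) ≥ min_item_area))) := by
    intro l m hm
    obtain ⟨hnd, hmem⟩ := hpart l m hm
    refine ⟨hnd, ?_⟩
    intro x hx
    have hxl : st.1.get? x = some l := (hmem x).mp hx
    have hxdom := (hdom x).mp (pvIsSome_of_eq_some hxl)
    have hfx : pvFreeC (pvOccB grid width) height width x = true := hxdom.2
    obtain ⟨ndr, memr⟩ := pvRegion_spec (pvOccB grid width) height width x hfx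
    have hperm : (pvRegion (pvOccB grid width) height width x).Perm m := by
      rw [List.perm_ext_iff_of_nodup ndr hnd]
      intro y
      rw [memr y]
      constructor
      · intro hy
        have hfy : pvFreeC (pvOccB grid width) height width y = true := pvR_free hfx hy
        have hyin : pvInB height width y = true := by
          simp only [pvFreeC, Bool.and_eq_true] at hfy
          exact hfy.1
        have hyds : (st.1.get? y).isSome :=
          (hdom y).mpr ⟨mem_pvCells.mpr hyin, hfy⟩
        obtain ⟨ly, hly⟩ := Option.isSome_iff_exists.mp hyds
        have : l = ly := (hconn x y l ly hxl hly).mpr ((pvConnL_cells _ _ _ x y).mpr hy)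
        exact (hmem y).mpr (this ▸ hly)
      · intro hy
        have hyl : st.1.get? y = some l := (hmem y).mp hy
        exact (pvConnL_cells _ _ _ x y).mp ((hconn x y l l hxl hyl).mp rfl)
    refine ⟨hfx, ?_⟩
    unfold pvBig
    rw [hperm.length_eq]
  have hcount : ∀ l m, st.2.get? l = some m →
      List.countP (fun q => pvFreeC (pvOccB grid width) height width q &&
        pvBig (pvOccB grid width) height width min_item_area q) m
      = if (m.length : Int) ≥ min_item_area then m.length else 0 := by
    intro l m hm
    obtain ⟨_, hall⟩ := hitem l m hm
    by_cases hb : (m.length : Int) ≥ min_item_area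
    · rw [if_pos hb]
      refine List.countP_eq_length.mpr ?_
      intro x hx
      obtain ⟨h1, h2⟩ := hall x hx
      rw [h1, h2, decide_eq_true hb]
      rfl
    · rw [if_neg hb]
      refine List.countP_eq_zero.mpr ?_
      intro x hx
      obtain ⟨h1, h2⟩ := hall x hx
      rw [h1, h2, decide_eq_false hb]
      simp
  -- flatten of the values is a permutation of the free cells
  have hvals : st.2.values = st.2.items.map (fun pr => pr.2) := rfl
  have hitems_get : ∀ pr ∈ st.2.items, st.2.get? pr.1 = some pr.2 := by
    intro pr hpr
    exact PySem.Dict.get?_of_mem_items st.2 (by exact hpr) hknd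
  have hflat_nodup : st.2.values.flatten.Nodup := by
    rw [List.nodup_flatten]
    constructor
    · intro m hmv
      rw [hvals] at hmv
      obtain ⟨pr, hpr, rfl⟩ := List.mem_map.mp hmv
      exact (hpart pr.1 pr.2 (hitems_get pr hpr)).1
    · rw [hvals]
      rw [List.pairwise_map]
      have hkeys : st.2.items.Pairwise (fun u v => u.1 ≠ v.1) := by
        have : (st.2.items.map (fun pr => pr.1)).Nodup := hknd
        exact List.pairwise_map.mp this
      refine hkeys.imp_of_mem ?_
      intro u v hu hv huv
      rw [List.disjoint_left]
      intro x hxu hxv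
      have h1 := ((hpart u.1 u.2 (hitems_get u hu)).2 x).mp hxu
      have h2 := ((hpart v.1 v.2 (hitems_get v hv)).2 x).mp hxv
      rw [h1] at h2
      exact huv (by simpa using h2)
  have hflat_mem : ∀ x, x ∈ st.2.values.flatten ↔
      (x ∈ pvCells height width ∧ pvFreeC (pvOccB grid width) height width x = true) := by
    intro x
    rw [List.mem_flatten]
    constructor
    · rintro ⟨m, hmv, hxm⟩
      rw [hvals] at hmv
      obtain ⟨pr, hpr, rfl⟩ := List.mem_map.mp hmv
      have hxl := ((hpart pr.1 pr.2 (hitems_get pr hpr)).2 x).mp hxm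
      exact (hdom x).mp (pvIsSome_of_eq_some hxl)
    · rintro ⟨h1, h2⟩
      obtain ⟨lx, hlx⟩ := Option.isSome_iff_exists.mp ((hdom x).mpr ⟨h1, h2⟩)
      obtain ⟨mx, hmx⟩ := Option.isSome_iff_exists.mp (hlab x lx hlx)
      refine ⟨mx, ?_, (hpart lx mx hmx).2 x |>.mpr hlx⟩
      rw [hvals]
      exact List.mem_map.mpr ⟨(lx, mx),
        (PySem.Dict.get?_eq_some_iff_mem_items st.2 lx mx hknd).mp hmx, rfl⟩
  have hflat_perm : st.2.values.flatten.Perm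
      ((pvCells height width).filter (pvFreeC (pvOccB grid width) height width)) := by
    rw [List.perm_ext_iff_of_nodup hflat_nodup ((nodup_pvCells height width).filter _)]
    intro x
    rw [hflat_mem x, List.mem_filter]
  -- assemble
  rw [pvSumFold, zero_add]
  have hmapeq : st.2.values.map (fun m =>
      if (m.length : Int) ≥ min_item_area then (m.length : Int) else 0)
      = st.2.values.map (fun m => ((List.countP (fun q =>
          pvFreeC (pvOccB grid width) height width q &&
          pvBig (pvOccB grid width) height width min_item_area q) m : Nat) : Int)) := by
    rw [hvals, List.map_map, List.map_map]
    refine List.map_congr_left ?_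
    intro pr hpr
    have := hcount pr.1 pr.2 (hitems_get pr hpr)
    simp only [Function.comp_apply, this]
    by_cases hb : (pr.2.length : Int) ≥ min_item_area
    · rw [if_pos hb, if_pos hb]
    · rw [if_neg hb, if_neg hb]; rfl
  rw [hmapeq]
  have hcast : ∀ (ms : List (List (Int × Int))) (f : List (Int × Int) → Nat),
      (ms.map (fun m => ((f m : Nat) : Int))).sum = (((ms.map f).sum : Nat) : Int) := by
    intro ms f
    induction ms with
    | nil => simp
    | cons m ms ih => simp [ih]
  rw [hcast]
  congr 1
  rw [← List.countP_flatten, hflat_perm.countP_eq, List.countP_filter]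
  refine List.countP_congr ?_
  intro x _
  by_cases hf : pvFreeC (pvOccB grid width) height width x = true
  · simp [hf]
  · simp only [Bool.not_eq_true] at hf
    simp [hf]

-- ===== VERDICT (by name: the statement is the Claim_ definition above) =====
theorem is_space_sufficient_spec : Claim_equal_is_space_sufficient := by
  unfold Claim_equal_is_space_sufficient
  intro grid width height required_area min_item_area slack _ _
  unfold Spec_is_space_sufficient
  have hA : is_space_sufficient grid width height required_area min_item_area slack =
      (if width * height - pvUsedArea grid < required_area then false
       else if width * height - pvUsedArea grid > required_area + slack then true
       else
         match (PySem.List.pyRange 0 height).foldl (fun st r =>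
             (PySem.List.pyRange 0 width).foldl (fun st c =>
               pvBodyA grid width height required_area min_item_area st (r, c)) st)
             (some (PySem.Set.ofList [], (0 : Int))) with
         | none => true
         | some (_, usable) => decide (usable ≥ required_area)) := rfl
  have hB : is_space_sufficient_alt grid width height required_area min_item_area slack =
      (if width * height - pvUsedArea grid < required_area then false
       else if width * height - pvUsedArea grid > required_area + slack then true
       else
         decide ((((PySem.List.pyRange 0 height).foldl (fun st r =>
             (PySem.List.pyRange 0 width).foldl (fun st c =>
               pvBodyAlt grid width st (r, c)) st)
             (PySem.Dict.empty, PySem.Dict.empty)).2.values.foldl (fun s cells =>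
               if (cells.length : Int) ≥ min_item_area then s + (cells.length : Int) else s) 0)
           ≥ required_area)) := rfl
  rw [hA, hB]
  by_cases h1 : width * height - pvUsedArea grid < required_area
  · rw [if_pos h1, if_pos h1]
  · rw [if_neg h1, if_neg h1]
    by_cases h2 : width * height - pvUsedArea grid > required_area + slack
    · rw [if_pos h2, if_pos h2]
    · rw [if_neg h2, if_neg h2]
      rw [pvFlatA, pvFlatAlt]
      have hinv := pvFoldInvAlt grid width height (pvCells height width) []
        (PySem.Dict.empty, PySem.Dict.empty) (by simp)
        (pvInv_init (pvOccB grid width) height width)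
      rw [pvB_count grid width height min_item_area _ (by simpa using hinv)]
      refine pvA_loop grid width height required_area min_item_area
        (pvCells height width) (fun x hx => mem_pvCells.mp hx)
        (PySem.Set.ofList []) 0 (PySem.Set.nodup_ofList _) ?_ ?_ (by simp) ?_
      · intro p hp
        simp [PySem.Set.ofList] at hp
      · intro p p' hp _
        simp [PySem.Set.ofList] at hp
      · intro p hp
        refine Or.inl (mem_pvCells.mpr ?_)
        simp only [pvFreeC, Bool.and_eq_true] at hp
        exact hp.1
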